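-- pv_equiv track=rewrite | github.com/unhhyyeexx/ProblemSolving | 프로그래머스/unrated/250136. ［PCCP 기출문제］ 2번 ／ 석유 시추/［PCCP 기출문제］ 2번 ／ 석유 시추.py | solution
-- ===== SOURCE A (Python) =====
-- from collections import deque
-- from collections import defaultdict
--
-- def solution(land):
--     n, m = len(land), len(land[0])
--     answer = 0
--
--     dir = [[1,0], [-1,0], [0,1], [0,-1]]
--
--     dic = defaultdict(int)
--
--     for i in range(n):
--         for j in range(m):
--             if land[i][j] == 1:
--                 land[i][j] = -1
--                 cnt = 1
--                 col = {j}
--                 q = deque([(i, j)])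
--
--                 while q:
--                     x, y = q.popleft()
--
--                     for di, dj in dir:
--                         ni, nj = x+di, y+dj
--                         if 0<=ni<n and 0<=nj<m and land[ni][nj] == 1:
--                             q.append((ni, nj))
--                             cnt += 1
--                             land[ni][nj] = -1
--                             col.add(nj)
--
--                 for c in list(col):
--                     dic[c] += cnt
--
--     answer = dic[max(dic, key=dic.get)]
--
--
--     return answer
-- ===== SOURCE B (Python) =====
-- def solution(land):
--     # Global min-label propagation (no per-seed flood fill): every oil cell starts
--     # labelled with its own flat index i*m+j; sweeps lower each label to the minimum
--     # over the cell and its oil neighbours until a fixpoint, so each connected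
--     # component ends up labelled with its smallest flat index.  Column totals then
--     # come from counting labels.  (Unlike the original, `land` is not mutated.)
--     n, m = len(land), len(land[0])
--     lab = [i * m + j if land[i][j] == 1 else -1
--            for i in range(n) for j in range(m)]
--     changed = True
--     while changed:
--         changed = False
--         new = []
--         for p in range(n * m):
--             v = lab[p]
--             if v >= 0:
--                 i, j = divmod(p, m)
--                 for a, b in ((i + 1, j), (i - 1, j), (i, j + 1), (i, j - 1)):
--                     if 0 <= a < n and 0 <= b < m and 0 <= lab[a * m + b] < v:
--                         v = lab[a * m + b]
--                 if v != lab[p]: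
--                     changed = True
--             new.append(v)
--         lab = new
--     size = {}
--     for v in lab:
--         if v >= 0:
--             size[v] = size.get(v, 0) + 1
--     totals = [0] * m
--     for j in range(m):
--         seen = set()
--         for i in range(n):
--             v = lab[i * m + j]
--             if v >= 0 and v not in seen:
--                 seen.add(v)
--                 totals[j] += size[v]
--     return max(totals)
-- ===== Notes on version B (the rewrite author's own statement) =====
-- stated objective: alternative
-- what changed: Replaces the per-seed mutating deque-BFS flood fill by global min-label propagation: every oil cell starts labelled with its flat index, whole-grid sweeps lower each label to the minimum over the cell and its oil neighbours until a fixpoint, so connected components become label classes, which are then counted per column; A also mutates land in place and raises ValueError on oil-free grids (noted via Pre_/Raises_).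
import Mathlib
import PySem

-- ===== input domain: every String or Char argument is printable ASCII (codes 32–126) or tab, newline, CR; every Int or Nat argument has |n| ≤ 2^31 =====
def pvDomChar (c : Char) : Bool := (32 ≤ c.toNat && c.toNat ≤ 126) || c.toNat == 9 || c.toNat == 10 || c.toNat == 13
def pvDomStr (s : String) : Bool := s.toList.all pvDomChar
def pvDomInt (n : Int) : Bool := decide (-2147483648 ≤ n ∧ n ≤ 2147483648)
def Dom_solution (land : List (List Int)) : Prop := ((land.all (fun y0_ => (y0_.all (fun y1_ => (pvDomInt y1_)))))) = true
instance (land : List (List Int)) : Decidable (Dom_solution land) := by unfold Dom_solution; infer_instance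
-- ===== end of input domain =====

-- B replaces the per-seed mutating BFS flood fill by global min-label propagation to a
-- fixpoint; note the original mutates `land` in place (oil cells set to -1), B does not:
-- the equivalence proved here is about the RETURN value only.

-- shared low-level grid reads/writes (Python land[i][j] under the in-range guards of the sources)
def getC (g : List (List Int)) (i j : Nat) : Int := (g.getD i []).getD j 0
def setC (g : List (List Int)) (i j : Nat) (v : Int) : List (List Int) :=
  g.set i ((g.getD i []).set j v)

def onesCount (g : List (List Int)) : Nat := (g.map (fun r => r.count 1)).sum

-- ===== PORT A =====
-- dir = [[1,0], [-1,0], [0,1], [0,-1]]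
def dirsA : List (Int × Int) := [(1,0), (-1,0), (0,1), (0,-1)]

-- body of "for di, dj in dir: …" (state: land, q, cnt, col); marks land[ni][nj] = -1 in place
def bodyA (n m x y : Int)
    (st : List (List Int) × List (Int × Int) × Int × PySem.Set Int) (d : Int × Int) :
    List (List Int) × List (Int × Int) × Int × PySem.Set Int :=
  let ni := x + d.1
  let nj := y + d.2
  if 0 ≤ ni ∧ ni < n ∧ 0 ≤ nj ∧ nj < m ∧ getC st.1 ni.toNat nj.toNat == 1 then
    (setC st.1 ni.toNat nj.toNat (-1), st.2.1 ++ [(ni, nj)], st.2.2.1 + 1,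
      PySem.Set.add st.2.2.2 nj)
  else st

def stepA (n m : Int) (g : List (List Int)) (q : List (Int × Int)) (x y : Int)
    (cnt : Int) (col : PySem.Set Int) :
    List (List Int) × List (Int × Int) × Int × PySem.Set Int :=
  dirsA.foldl (bodyA n m x y) (g, q, cnt, col)

theorem count_set_ne_one (r : List Int) (j : Nat) (h : r.getD j 0 = 1) :
    (r.set j (-1)).count 1 + 1 = r.count 1 := by
  induction r generalizing j with
  | nil => simp [List.getD] at h
  | cons a t ih =>
    cases j with
    | zero => simp_all
    | succ j' =>
      have := ih j' (by simpa [List.getD] using h)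
      simp [List.count_cons, List.set]
      omega

theorem onesCount_setC (g : List (List Int)) (i j : Nat) (h : getC g i j = 1) :
    onesCount (setC g i j (-1)) + 1 = onesCount g := by
  induction g generalizing i with
  | nil => simp [getC, List.getD] at h
  | cons r t ih =>
    cases i with
    | zero =>
      have := count_set_ne_one r j (by simpa [getC, List.getD] using h)
      simp [setC, onesCount, List.getD]
      omega
    | succ i' =>
      have := ih i' (by simpa [getC, List.getD] using h)
      simp only [setC, getC, List.getD, List.getElem?_cons_succ, List.set_cons_succ,
        onesCount, List.map_cons, List.sum_cons] at *
      omega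

def muA (st : List (List Int) × List (Int × Int) × Int × PySem.Set Int) : Nat :=
  5 * onesCount st.1 + st.2.1.length

theorem muA_bodyA (n m x y : Int) (st : List (List Int) × List (Int × Int) × Int × PySem.Set Int) (d : Int × Int) :
    muA (bodyA n m x y st d) ≤ muA st := by
  unfold bodyA
  dsimp only
  split
  · rename_i hg
    have h1 : getC st.1 (x + d.1).toNat (y + d.2).toNat = 1 := by
      have := hg.2.2.2.2; simpa using this
    have := onesCount_setC st.1 (x + d.1).toNat (y + d.2).toNat h1
    simp [muA]
    omega
  · exact le_refl _

theorem muA_foldl (n m x y : Int) (l : List (Int × Int)) (st : List (List Int) × List (Int × Int) × Int × PySem.Set Int) :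
    muA (l.foldl (bodyA n m x y) st) ≤ muA st := by
  induction l generalizing st with
  | nil => exact le_refl _
  | cons d t ih => exact le_trans (ih _) (muA_bodyA n m x y st d)

theorem muA_stepA (n m : Int) (g : List (List Int)) (q : List (Int × Int)) (x y : Int)
    (cnt : Int) (col : PySem.Set Int) :
    muA (stepA n m g q x y cnt col) ≤ 5 * onesCount g + q.length :=
  muA_foldl n m x y dirsA (g, q, cnt, col)

-- while q: x, y = q.popleft(); …
def bfsA (n m : Int) (g : List (List Int)) (q : List (Int × Int)) (cnt : Int)
    (col : PySem.Set Int) : List (List Int) × Int × PySem.Set Int :=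
  match q with
  | [] => (g, cnt, col)
  | (x, y) :: q' =>
    let s := stepA n m g q' x y cnt col
    bfsA n m s.1 s.2.1 s.2.2.1 s.2.2.2
termination_by 5 * onesCount g + q.length
decreasing_by
  have := muA_stepA n m g q' x y cnt col
  simp [muA] at this ⊢
  omega

-- body of the scan "for i in range(n): for j in range(m): …" (state: land, dic)
def cellA (n m : Int) (st : List (List Int) × PySem.Dict Int Int) (i j : Int) :
    List (List Int) × PySem.Dict Int Int :=
  if getC st.1 i.toNat j.toNat == 1 then
    let g1 := setC st.1 i.toNat j.toNat (-1)
    let r := bfsA n m g1 [(i, j)] 1 (PySem.Set.add PySem.Set.empty j)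
    -- for c in list(col): dic[c] += cnt   (defaultdict(int); iteration order of the Python
    -- set is a hash order PySem does not model — the returned VALUE does not depend on it)
    let dic1 := r.2.2.foldl (fun d c => PySem.Dict.modify d c 0 (· + r.2.1)) st.2
    (r.1, dic1)
  else st

def solution (land : List (List Int)) : Int :=
  let n := land.length
  let m := (land.headD []).length
  let st := (PySem.List.pyRange 0 n 1).foldl (fun st i =>
      (PySem.List.pyRange 0 m 1).foldl (fun st j => cellA n m st i j) st)
    (land, PySem.Dict.empty)
  -- answer = dic[max(dic, key=dic.get)]  (dict key order may differ from CPython's, the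
  -- looked-up VALUE — the returned int — does not depend on it)
  match PySem.List.max? (PySem.Dict.keys st.2) (fun k => PySem.Dict.getD st.2 k 0) with
  | some k => PySem.Dict.getD st.2 k 0
  | none => 0

-- ===== PORT B =====
-- ((i+1,j), (i-1,j), (i,j+1), (i,j-1))
def nbrsB (i j : Int) : List (Int × Int) := [(i+1, j), (i-1, j), (i, j+1), (i, j-1)]

-- the running minimum of "for a, b in ((i+1,j),…): if 0<=a<n and 0<=b<m and 0<=lab[a*m+b]<v: v=…"
def nbrMin (n m : Int) (lab : List Int) (l : List (Int × Int)) (v0 : Int) : Int :=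
  l.foldl (fun v ab =>
    if 0 ≤ ab.1 ∧ ab.1 < n ∧ 0 ≤ ab.2 ∧ ab.2 < m ∧
        0 ≤ PySem.List.pyGetD lab (ab.1 * m + ab.2) 0 ∧
        PySem.List.pyGetD lab (ab.1 * m + ab.2) 0 < v then
      PySem.List.pyGetD lab (ab.1 * m + ab.2) 0
    else v) v0

-- one iteration of "for p in range(n*m): …" building (new, changed)
def stepB (n m : Int) (lab : List Int) (st : List Int × Bool) (p : Int) : List Int × Bool :=
  let v0 := PySem.List.pyGetD lab p 0
  if 0 ≤ v0 then
    let v := nbrMin n m lab (nbrsB (PySem.Int.floordiv p m) (PySem.Int.mod p m)) v0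
    (st.1 ++ [v], st.2 || decide (v ≠ v0))
  else (st.1 ++ [v0], st.2)

def sweepB (n m : Int) (lab : List Int) : List Int × Bool :=
  (PySem.List.pyRange 0 (n * m) 1).foldl (stepB n m lab) ([], false)

-- proof-side closed form of one sweep step (used for the termination measure)
def relaxF (n m : Int) (lab : List Int) (p : Int) : Int :=
  let v0 := PySem.List.pyGetD lab p 0
  if 0 ≤ v0 then
    nbrMin n m lab (nbrsB (PySem.Int.floordiv p m) (PySem.Int.mod p m)) v0
  else v0

theorem stepB_eq (n m : Int) (lab : List Int) (st : List Int × Bool) (p : Int) :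
    stepB n m lab st p =
      (st.1 ++ [relaxF n m lab p],
        st.2 || decide (relaxF n m lab p ≠ PySem.List.pyGetD lab p 0)) := by
  unfold stepB relaxF
  dsimp only
  split
  · rfl
  · simp

theorem sweepB_run (n m : Int) (lab : List Int) (l : List Int) :
    ∀ (acc : List Int) (b : Bool),
    l.foldl (stepB n m lab) (acc, b) =
      (acc ++ l.map (relaxF n m lab),
        b || l.any (fun p => decide (relaxF n m lab p ≠ PySem.List.pyGetD lab p 0))) := by
  induction l with
  | nil => intro acc b; simp
  | cons p t ih =>
    intro acc b
    simp only [List.foldl_cons, stepB_eq]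
    rw [ih]
    simp [Bool.or_assoc]

theorem sweepB_eq (n m : Int) (lab : List Int) :
    sweepB n m lab =
      ((PySem.List.pyRange 0 (n * m) 1).map (relaxF n m lab),
        (PySem.List.pyRange 0 (n * m) 1).any
          (fun p => decide (relaxF n m lab p ≠ PySem.List.pyGetD lab p 0))) := by
  unfold sweepB
  rw [sweepB_run]
  simp

theorem nbrMin_le (n m : Int) (lab : List Int) (l : List (Int × Int)) :
    ∀ v0 : Int, nbrMin n m lab l v0 ≤ v0 := by
  induction l with
  | nil => intro v0; exact le_refl _
  | cons ab t ih =>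
    intro v0
    unfold nbrMin at *
    simp only [List.foldl_cons]
    split
    · rename_i h
      exact le_trans (ih _) (le_of_lt h.2.2.2.2.2)
    · exact ih _

theorem nbrMin_cases (n m : Int) (lab : List Int) (l : List (Int × Int)) :
    ∀ v0 : Int, nbrMin n m lab l v0 = v0 ∨
      ∃ ab ∈ l, (0 ≤ ab.1 ∧ ab.1 < n ∧ 0 ≤ ab.2 ∧ ab.2 < m ∧
          0 ≤ PySem.List.pyGetD lab (ab.1 * m + ab.2) 0) ∧
        nbrMin n m lab l v0 = PySem.List.pyGetD lab (ab.1 * m + ab.2) 0 := by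
  induction l with
  | nil => intro v0; left; rfl
  | cons ab t ih =>
    intro v0
    unfold nbrMin at *
    simp only [List.foldl_cons]
    split
    · rename_i h
      rcases ih (PySem.List.pyGetD lab (ab.1 * m + ab.2) 0) with h1 | ⟨ab', hm, hP, he⟩
      · right
        exact ⟨ab, List.mem_cons_self, ⟨h.1, h.2.1, h.2.2.1, h.2.2.2.1, h.2.2.2.2.1⟩, h1⟩
      · right; exact ⟨ab', List.mem_cons_of_mem _ hm, hP, he⟩
    · rcases ih v0 with h1 | ⟨ab', hm, hP, he⟩
      · left; exact h1
      · right; exact ⟨ab', List.mem_cons_of_mem _ hm, hP, he⟩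

theorem relaxF_le (n m : Int) (lab : List Int) (p : Int) :
    relaxF n m lab p ≤ PySem.List.pyGetD lab p 0 := by
  unfold relaxF
  dsimp only
  split
  · exact nbrMin_le _ _ _ _ _
  · exact le_refl _

theorem relaxF_nonneg_of_ne (n m : Int) (lab : List Int) (p : Int)
    (h : relaxF n m lab p ≠ PySem.List.pyGetD lab p 0) : 0 ≤ relaxF n m lab p := by
  unfold relaxF at *
  dsimp only at *
  by_cases hv : 0 ≤ PySem.List.pyGetD lab p 0
  · rw [if_pos hv] at h ⊢
    rcases nbrMin_cases n m lab (nbrsB (PySem.Int.floordiv p m) (PySem.Int.mod p m))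
      (PySem.List.pyGetD lab p 0) with h1 | ⟨ab, _, hP, he⟩
    · exact absurd h1 h
    · rw [he]
      exact hP.2.2.2.2
  · rw [if_neg hv] at h
    exact absurd rfl h

def labMeasure (nm : Int) (lab : List Int) : Nat :=
  ((PySem.List.pyRange 0 nm 1).map (fun p => (PySem.List.pyGetD lab p 0 + 1).toNat)).sum

theorem pyGetD_map_relaxF (n m nm : Int) (lab : List Int) (p : Int)
    (h0 : 0 ≤ p) (h1 : p < nm) :
    PySem.List.pyGetD ((PySem.List.pyRange 0 nm 1).map (relaxF n m lab)) p 0 =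
      relaxF n m lab p :=
  PySem.List.pyGetD_map_pyRange_of_nonneg _ _ _ _ h0 h1

theorem sweepB_decreases (n m : Int) (lab : List Int) (h : (sweepB n m lab).2 = true) :
    labMeasure (n * m) (sweepB n m lab).1 < labMeasure (n * m) lab := by
  rw [sweepB_eq] at h ⊢
  dsimp only at h ⊢
  unfold labMeasure
  apply List.sum_lt_sum
  · intro p hp
    have hr := PySem.List.mem_pyRange_one.mp hp
    rw [pyGetD_map_relaxF n m (n * m) lab p hr.1 hr.2]
    have := relaxF_le n m lab p
    omega
  · rcases List.any_eq_true.mp h with ⟨p, hp, hne⟩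
    have hr := PySem.List.mem_pyRange_one.mp hp
    have hne' : relaxF n m lab p ≠ PySem.List.pyGetD lab p 0 := by simpa using hne
    refine ⟨p, hp, ?_⟩
    rw [pyGetD_map_relaxF n m (n * m) lab p hr.1 hr.2]
    have h1 := relaxF_le n m lab p
    have h2 := relaxF_nonneg_of_ne n m lab p hne'
    omega

-- while changed: …  (measure: sum of the label values over the grid positions)
def propagateB (n m : Int) (lab : List Int) : List Int :=
  let s := sweepB n m lab
  if h : s.2 = true then propagateB n m s.1 else s.1
termination_by labMeasure (n * m) lab
decreasing_by exact sweepB_decreases n m lab h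

def solution_alt (land : List (List Int)) : Int :=
  let n := (land.length : Int)
  let m := ((land.headD []).length : Int)
  -- lab = [i*m+j if land[i][j] == 1 else -1 for i in range(n) for j in range(m)]
  let lab0 := (PySem.List.pyRange 0 n 1).flatMap (fun i =>
    (PySem.List.pyRange 0 m 1).map (fun j =>
      if getC land i.toNat j.toNat == 1 then i * m + j else -1))
  let lab := propagateB n m lab0
  -- size[v] = size.get(v, 0) + 1 for each v >= 0 in lab
  let size := lab.foldl (fun (d : PySem.Dict Int Int) v =>
    if 0 ≤ v then d.insert v (d.getD v 0 + 1) else d) PySem.Dict.empty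
  -- totals[j] += size[v] for each first-seen label v in column j
  let totals := (PySem.List.pyRange 0 m 1).foldl (fun totals j =>
    ((PySem.List.pyRange 0 n 1).foldl (fun (st : List Int × PySem.Set Int) i =>
      let v := PySem.List.pyGetD lab (i * m + j) 0
      if 0 ≤ v ∧ ¬ PySem.Set.contains st.2 v = true then
        (PySem.List.pySetD st.1 j (PySem.List.pyGetD st.1 j 0 + size.getD v 0),
          PySem.Set.add st.2 v)
      else st) (totals, PySem.Set.empty)).1) (List.replicate m.toNat 0)
  match PySem.List.max? totals (fun x => x) with
  | some v => v
  | none => 0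

-- ===== PRECONDITION & SPEC =====
-- Pre_ is exactly where the Python A returns: a nonempty grid whose rows all reach the width
-- of the first row (else IndexError) containing at least one oil cell in the first m columns
-- (else ValueError: max() of the empty dict).
def Pre_solution (land : List (List Int)) : Prop :=
  land ≠ [] ∧ (∀ row ∈ land, (land.headD []).length ≤ row.length) ∧
    (∃ row ∈ land, 1 ∈ row.take (land.headD []).length)
instance (land : List (List Int)) : Decidable (Pre_solution land) := by
  unfold Pre_solution; infer_instance

def pvWitness_solution : List (List Int) := [[1, 0], [0, 1]]

def Spec_solution (land : List (List Int)) (out : Int) : Prop := out = solution_alt land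
instance (land : List (List Int)) (out : Int) : Decidable (Spec_solution land out) := by
  unfold Spec_solution; infer_instance

-- ===== CLAIM (what is proved, stated in full; the proofs are below) =====
def Claim_equal_solution : Prop :=
  ∀ (land : List (List Int)), Dom_solution land → Pre_solution land →
    Spec_solution land (solution land)

-- ===== LEMMAS AND PROOFS =====

theorem propagateB_eq (n m : Int) (lab : List Int) :
    propagateB n m lab =
      if (sweepB n m lab).2 = true then propagateB n m (sweepB n m lab).1
      else (sweepB n m lab).1 := by
  rw [propagateB]
  rfl


theorem nbrMin_le_mem (n m : Int) (lab : List Int) (l : List (Int × Int)) (ab : Int × Int)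
    (hm : ab ∈ l)
    (hP : 0 ≤ ab.1 ∧ ab.1 < n ∧ 0 ≤ ab.2 ∧ ab.2 < m ∧
      0 ≤ PySem.List.pyGetD lab (ab.1 * m + ab.2) 0) :
    ∀ v0 : Int, nbrMin n m lab l v0 ≤ PySem.List.pyGetD lab (ab.1 * m + ab.2) 0 := by
  induction l with
  | nil => simp at hm
  | cons hd t ih =>
    intro v0
    unfold nbrMin at *
    simp only [List.foldl_cons]
    rcases List.mem_cons.mp hm with rfl | hmt
    · split
      · rename_i h
        exact nbrMin_le n m lab t _
      · rename_i h
        have : ¬ PySem.List.pyGetD lab (ab.1 * m + ab.2) 0 < v0 := by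
          intro hlt
          exact h ⟨hP.1, hP.2.1, hP.2.2.1, hP.2.2.2.1, hP.2.2.2.2, hlt⟩
        exact le_trans (nbrMin_le n m lab t v0) (by omega)
    · split
      · exact ih hmt _
      · exact ih hmt _


-- ==== middle layer: the grid graph (oil cells, 4-adjacency, reachability) ====

def NI (land : List (List Int)) : Int := (land.length : Int)
def MI (land : List (List Int)) : Int := ((land.headD []).length : Int)

def InRange (land : List (List Int)) (p : Int × Int) : Prop :=
  0 ≤ p.1 ∧ p.1 < NI land ∧ 0 ≤ p.2 ∧ p.2 < MI land

def oilP (land : List (List Int)) (p : Int × Int) : Prop :=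
  InRange land p ∧ getC land p.1.toNat p.2.toNat = 1

def oilB (land : List (List Int)) (p : Int × Int) : Bool :=
  decide (0 ≤ p.1) && decide (p.1 < NI land) && decide (0 ≤ p.2) && decide (p.2 < MI land) &&
    (getC land p.1.toNat p.2.toNat == 1)

theorem oilB_iff (land : List (List Int)) (p : Int × Int) :
    oilB land p = true ↔ oilP land p := by
  unfold oilB oilP InRange
  simp [and_assoc]

def adjP (land : List (List Int)) (p q : Int × Int) : Prop :=
  oilP land p ∧ oilP land q ∧ q ∈ nbrsB p.1 p.2

def ReachP (land : List (List Int)) : (Int × Int) → (Int × Int) → Prop :=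
  Relation.ReflTransGen (adjP land)

theorem mem_nbrsB_symm (p q : Int × Int) (h : q ∈ nbrsB p.1 p.2) : p ∈ nbrsB q.1 q.2 := by
  obtain ⟨px, py⟩ := p
  obtain ⟨qx, qy⟩ := q
  simp only [nbrsB, List.mem_cons, List.not_mem_nil, or_false, Prod.mk.injEq] at h ⊢
  omega

theorem adjP_symm (land : List (List Int)) : Symmetric (adjP land) := by
  intro p q h
  exact ⟨h.2.1, h.1, mem_nbrsB_symm p q h.2.2⟩

theorem reach_symm (land : List (List Int)) {p q : Int × Int} (h : ReachP land p q) :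
    ReachP land q p :=
  Relation.ReflTransGen.symmetric (adjP_symm land) h

theorem reach_oil (land : List (List Int)) {p q : Int × Int} (h : ReachP land p q)
    (hp : oilP land p) : oilP land q := by
  induction h with
  | refl => exact hp
  | tail _ hadj _ => exact hadj.2.1

-- flat index arithmetic
theorem idx_lt (n m : Int) (p : Int × Int) (h1 : 0 ≤ p.1) (h2 : p.1 < n) (h3 : 0 ≤ p.2)
    (h4 : p.2 < m) : p.1 * m + p.2 < n * m := by
  nlinarith

theorem idx_nonneg' (m : Int) (p : Int × Int) (h1 : 0 ≤ p.1) (h3 : 0 ≤ p.2) (h4 : p.2 < m) :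
    0 ≤ p.1 * m + p.2 := by nlinarith

theorem idx_div (m : Int) (i j : Int) (h3 : 0 ≤ j) (h4 : j < m) :
    PySem.Int.floordiv (i * m + j) m = i := by
  rw [PySem.Int.floordiv_eq_iff_of_pos (by omega)]
  constructor <;> nlinarith

theorem idx_mod (m : Int) (i j : Int) (h3 : 0 ≤ j) (h4 : j < m) :
    PySem.Int.mod (i * m + j) m = j := by
  have := PySem.Int.floordiv_mul_add_mod (i * m + j) m
  rw [idx_div m i j h3 h4] at this
  omega

theorem idx_inj (m : Int) (p q : Int × Int) (hp2 : 0 ≤ p.2) (hp4 : p.2 < m)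
    (hq2 : 0 ≤ q.2) (hq4 : q.2 < m) (h : p.1 * m + p.2 = q.1 * m + q.2) : p = q := by
  obtain ⟨px, py⟩ := p
  obtain ⟨qx, qy⟩ := q
  simp only at *
  have hx : px = qx := by
    by_contra hne
    rcases lt_or_gt_of_ne hne with hlt | hlt
    · nlinarith
    · nlinarith
  subst hx
  simp only [Prod.mk.injEq, true_and]
  omega

-- cell labels read out of a flat label list
def labAt (m : Int) (L : List Int) (p : Int × Int) : Int :=
  PySem.List.pyGetD L (p.1 * m + p.2) 0

-- invariant of the sweeps: labels of non-oil cells are -1, the label of an oil cell is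
-- the flat index of a cell reachable from it
def LabInv (land : List (List Int)) (L : List Int) : Prop :=
  ∀ p : Int × Int, InRange land p →
    (¬ oilP land p → labAt (MI land) L p = -1) ∧
    (oilP land p → ∃ q : Int × Int, ReachP land p q ∧
      labAt (MI land) L p = q.1 * MI land + q.2)

-- a fixpoint of the sweep
def FixL (land : List (List Int)) (L : List Int) : Prop :=
  ∀ pos : Int, 0 ≤ pos → pos < NI land * MI land →
    PySem.List.pyGetD L pos 0 = relaxF (NI land) (MI land) L pos

theorem oil_lab_nonneg (land : List (List Int)) (L : List Int) (hI : LabInv land L)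
    {p : Int × Int} (hp : oilP land p) : 0 ≤ labAt (MI land) L p := by
  obtain ⟨q, hq, he⟩ := (hI p hp.1).2 hp
  have hqo : oilP land q := reach_oil land hq hp
  rw [he]
  exact idx_nonneg' (MI land) q hqo.1.1 hqo.1.2.2.1 hqo.1.2.2.2

theorem lab_nonneg_oil (land : List (List Int)) (L : List Int) (hI : LabInv land L)
    {p : Int × Int} (hp : InRange land p) (h : 0 ≤ labAt (MI land) L p) : oilP land p := by
  by_contra hno
  have := (hI p hp).1 hno
  omega

-- relaxF unfolded at a cell's flat index
theorem relaxF_at_cell (n m : Int) (L : List Int) (p : Int × Int) (h3 : 0 ≤ p.2)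
    (h4 : p.2 < m) :
    relaxF n m L (p.1 * m + p.2) =
      if 0 ≤ labAt m L p then nbrMin n m L (nbrsB p.1 p.2) (labAt m L p)
      else labAt m L p := by
  unfold relaxF labAt
  rw [idx_div m p.1 p.2 h3 h4, idx_mod m p.1 p.2 h3 h4]

theorem labAt_sweep (land : List (List Int)) (L : List Int) (p : Int × Int)
    (hp : InRange land p) :
    labAt (MI land) ((sweepB (NI land) (MI land) L).1) p =
      relaxF (NI land) (MI land) L (p.1 * MI land + p.2) := by
  obtain ⟨h1, h2, h3, h4⟩ := hp
  unfold labAt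
  rw [sweepB_eq]
  exact pyGetD_map_relaxF _ _ _ _ _ (idx_nonneg' _ p h1 h3 h4)
    (idx_lt _ _ p h1 h2 h3 h4)

theorem LabInv_sweep (land : List (List Int)) (L : List Int) (hI : LabInv land L) :
    LabInv land ((sweepB (NI land) (MI land) L).1) := by
  intro p hp
  have hrw := labAt_sweep land L p hp
  rw [relaxF_at_cell (NI land) (MI land) L p hp.2.2.1 hp.2.2.2] at hrw
  constructor
  · intro hno
    have hm1 := (hI p hp).1 hno
    rw [hrw, hm1]
    norm_num
  · intro ho
    have h0 := oil_lab_nonneg land L hI ho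
    rw [hrw, if_pos h0]
    rcases nbrMin_cases (NI land) (MI land) L (nbrsB p.1 p.2) (labAt (MI land) L p) with
      he | ⟨ab, hmem, hP, he⟩
    · obtain ⟨q, hq, hqe⟩ := (hI p hp).2 ho
      exact ⟨q, hq, by rw [he]; exact hqe⟩
    · have habI : InRange land ab := ⟨hP.1, hP.2.1, hP.2.2.1, hP.2.2.2.1⟩
      have habL : 0 ≤ labAt (MI land) L ab := hP.2.2.2.2
      have habo : oilP land ab := lab_nonneg_oil land L hI habI habL
      obtain ⟨q, hq, hqe⟩ := (hI ab habI).2 habo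
      refine ⟨q, ?_, by rw [he]; exact hqe⟩
      exact Relation.ReflTransGen.head ⟨ho, habo, hmem⟩ hq

theorem nbrMin_congr (n m : Int) (L L' : List Int)
    (hag : ∀ q : Int, 0 ≤ q → q < n * m →
      PySem.List.pyGetD L q 0 = PySem.List.pyGetD L' q 0) (l : List (Int × Int)) :
    ∀ v0 : Int, nbrMin n m L l v0 = nbrMin n m L' l v0 := by
  induction l with
  | nil => intro v0; rfl
  | cons ab t ih =>
    intro v0
    unfold nbrMin at *
    simp only [List.foldl_cons]
    by_cases hb : 0 ≤ ab.1 ∧ ab.1 < n ∧ 0 ≤ ab.2 ∧ ab.2 < m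
    · have hq := hag (ab.1 * m + ab.2) (idx_nonneg' m ab hb.1 hb.2.2.1 hb.2.2.2)
        (idx_lt n m ab hb.1 hb.2.1 hb.2.2.1 hb.2.2.2)
      rw [hq]
      by_cases hg : 0 ≤ PySem.List.pyGetD L' (ab.1 * m + ab.2) 0 ∧
          PySem.List.pyGetD L' (ab.1 * m + ab.2) 0 < v0
      · rw [if_pos ⟨hb.1, hb.2.1, hb.2.2.1, hb.2.2.2, hg.1, hg.2⟩]
        exact ih _
      · rw [if_neg (fun hh => hg ⟨hh.2.2.2.2.1, hh.2.2.2.2.2⟩)]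
        exact ih _
    · rw [if_neg (fun hh => hb ⟨hh.1, hh.2.1, hh.2.2.1, hh.2.2.2.1⟩),
        if_neg (fun hh => hb ⟨hh.1, hh.2.1, hh.2.2.1, hh.2.2.2.1⟩)]
      exact ih _

theorem relaxF_congr (n m : Int) (L L' : List Int)
    (hag : ∀ q : Int, 0 ≤ q → q < n * m →
      PySem.List.pyGetD L q 0 = PySem.List.pyGetD L' q 0) (p : Int)
    (h0 : 0 ≤ p) (h1 : p < n * m) : relaxF n m L p = relaxF n m L' p := by
  unfold relaxF
  dsimp only
  rw [hag p h0 h1]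
  split
  · exact nbrMin_congr n m L L' hag _ _
  · rfl

theorem propagateB_spec (land : List (List Int)) :
    ∀ L : List Int, LabInv land L →
      LabInv land (propagateB (NI land) (MI land) L) ∧
      FixL land (propagateB (NI land) (MI land) L) := by
  intro L
  induction L using propagateB.induct (n := NI land) (m := MI land) with
  | case1 L s h ih =>
    intro hI
    rw [propagateB_eq,
      if_pos (show (sweepB (NI land) (MI land) L).2 = true from h)]
    exact ih (LabInv_sweep land L hI)
  | case2 L s h =>
    intro hI
    rw [propagateB_eq,
      if_neg (show ¬ (sweepB (NI land) (MI land) L).2 = true from h)]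
    have hflag : ∀ pos ∈ PySem.List.pyRange 0 (NI land * MI land) 1,
        relaxF (NI land) (MI land) L pos = PySem.List.pyGetD L pos 0 := by
      have h2 : ¬ (sweepB (NI land) (MI land) L).2 = true := h
      rw [sweepB_eq] at h2
      dsimp only at h2
      intro pos hpos
      by_contra hne
      exact h2 (List.any_eq_true.mpr ⟨pos, hpos, by simpa using hne⟩)
    have hagree : ∀ q : Int, 0 ≤ q → q < NI land * MI land →
        PySem.List.pyGetD (sweepB (NI land) (MI land) L).1 q 0 =
          PySem.List.pyGetD L q 0 := by
      intro q h0 h1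
      rw [sweepB_eq]
      dsimp only
      rw [pyGetD_map_relaxF _ _ _ _ _ h0 h1]
      exact hflag q (PySem.List.mem_pyRange_one.mpr ⟨h0, h1⟩)
    refine ⟨LabInv_sweep land L hI, ?_⟩
    intro pos h0 h1
    rw [hagree pos h0 h1, ← hflag pos (PySem.List.mem_pyRange_one.mpr ⟨h0, h1⟩)]
    exact (relaxF_congr _ _ _ _ hagree pos h0 h1).symm

-- ==== fixpoint consequences: labels are constant exactly on connected components ====

theorem lab_le_adj (land : List (List Int)) (L : List Int) (hI : LabInv land L)
    (hF : FixL land L) {p q : Int × Int} (h : adjP land p q) :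
    labAt (MI land) L p ≤ labAt (MI land) L q := by
  have hp := h.1
  have hq := h.2.1
  have hfix := hF (p.1 * MI land + p.2)
    (idx_nonneg' (MI land) p hp.1.1 hp.1.2.2.1 hp.1.2.2.2)
    (idx_lt (NI land) (MI land) p hp.1.1 hp.1.2.1 hp.1.2.2.1 hp.1.2.2.2)
  rw [relaxF_at_cell (NI land) (MI land) L p hp.1.2.2.1 hp.1.2.2.2] at hfix
  have h0 : 0 ≤ labAt (MI land) L p := oil_lab_nonneg land L hI hp
  rw [if_pos h0] at hfix
  have hle := nbrMin_le_mem (NI land) (MI land) L (nbrsB p.1 p.2) q h.2.2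
    ⟨hq.1.1, hq.1.2.1, hq.1.2.2.1, hq.1.2.2.2, oil_lab_nonneg land L hI hq⟩
    (labAt (MI land) L p)
  have : labAt (MI land) L p = nbrMin (NI land) (MI land) L (nbrsB p.1 p.2)
      (labAt (MI land) L p) := hfix
  rw [this]
  exact hle

theorem lab_eq_adj (land : List (List Int)) (L : List Int) (hI : LabInv land L)
    (hF : FixL land L) {p q : Int × Int} (h : adjP land p q) :
    labAt (MI land) L p = labAt (MI land) L q :=
  le_antisymm (lab_le_adj land L hI hF h) (lab_le_adj land L hI hF (adjP_symm land h))

theorem lab_eq_reach (land : List (List Int)) (L : List Int) (hI : LabInv land L)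
    (hF : FixL land L) {p q : Int × Int} (h : ReachP land p q) :
    labAt (MI land) L p = labAt (MI land) L q := by
  induction h with
  | refl => rfl
  | tail _ hadj ih => exact ih.trans (lab_eq_adj land L hI hF hadj)

theorem reach_of_lab_eq (land : List (List Int)) (L : List Int) (hI : LabInv land L)
    {p q : Int × Int} (hp : oilP land p) (hq : oilP land q)
    (h : labAt (MI land) L p = labAt (MI land) L q) : ReachP land p q := by
  obtain ⟨a, hpa, hea⟩ := (hI p hp.1).2 hp
  obtain ⟨b, hqb, heb⟩ := (hI q hq.1).2 hq
  have hao : oilP land a := reach_oil land hpa hp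
  have hbo : oilP land b := reach_oil land hqb hq
  have hab : a = b := idx_inj (MI land) a b hao.1.2.2.1 hao.1.2.2.2 hbo.1.2.2.1 hbo.1.2.2.2
    (by rw [← hea, ← heb, h])
  exact Relation.ReflTransGen.trans hpa (hab ▸ reach_symm land hqb)

-- ==== the initial labelling and the propagated labelling of the port of B ====

def lab0D (land : List (List Int)) : List Int :=
  (PySem.List.pyRange 0 (NI land) 1).flatMap (fun i =>
    (PySem.List.pyRange 0 (MI land) 1).map (fun j =>
      if getC land i.toNat j.toNat == 1 then i * MI land + j else -1))

def labD (land : List (List Int)) : List Int :=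
  propagateB (NI land) (MI land) (lab0D land)

theorem sum_map_const_nat (k m : Nat) : (((List.range k).map (fun _ => m)).sum = k * m) := by
  induction k with
  | zero => simp
  | succ k ih => rw [List.range_succ]; simp [ih, Nat.succ_mul]

theorem getD_flatMap_range (n mN : Nat) (G : Nat → Nat → Int) (i j : Nat) (hi : i < n)
    (hj : j < mN) :
    ((List.range n).flatMap (fun a => (List.range mN).map (fun b => G a b))).getD
      (i * mN + j) 0 = G i j := by
  induction n with
  | zero => omega
  | succ n ih =>
    rw [List.range_succ, List.flatMap_append]
    have hlen : ((List.range n).flatMap (fun a => (List.range mN).map (fun b => G a b))).length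
        = n * mN := by
      rw [List.length_flatMap]
      have : (List.range n).map (fun a => ((List.range mN).map (fun b => G a b)).length) =
          (List.range n).map (fun _ => mN) := by
        apply List.map_congr_left
        intro a _
        simp
      rw [this]
      exact sum_map_const_nat n mN
    by_cases hin : i < n
    · rw [List.getD_append _ _ _ _ (by rw [hlen]; nlinarith)]
      exact ih hin
    · have hie : i = n := by omega
      subst hie
      rw [List.getD_append_right _ _ _ _ (by rw [hlen]; nlinarith)]
      rw [hlen]
      have : i * mN + j - i * mN = j := by omega
      rw [this]
      simp only [List.flatMap_cons, List.flatMap_nil, List.append_nil]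
      exact PySem.List.getD_map_range _ _ _ _ hj

theorem labAt_lab0 (land : List (List Int)) (p : Int × Int) (hp : InRange land p) :
    labAt (MI land) (lab0D land) p =
      if getC land p.1.toNat p.2.toNat == 1 then p.1 * MI land + p.2 else -1 := by
  obtain ⟨h1, h2, h3, h4⟩ := hp
  unfold NI MI at *
  unfold labAt lab0D NI MI
  rw [PySem.List.pyGetD_of_nonneg _ _ (idx_nonneg' _ p h1 h3 h4)]
  simp only [PySem.List.pyRange_zero_nat, List.flatMap_map, List.map_map]
  have e1 : p.1 = (p.1.toNat : Int) := by omega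
  have e2 : p.2 = (p.2.toNat : Int) := by omega
  rw [e1, e2, ← Nat.cast_mul, ← Nat.cast_add, Int.toNat_natCast]
  exact getD_flatMap_range land.length (land.headD []).length
    (fun a b => if getC land a b == 1
      then (a : Int) * ((land.headD []).length : Int) + (b : Int) else -1)
    p.1.toNat p.2.toNat (by omega) (by omega)

theorem LabInv_lab0 (land : List (List Int)) : LabInv land (lab0D land) := by
  intro p hp
  rw [labAt_lab0 land p hp]
  constructor
  · intro hno
    rw [if_neg (fun hc => hno ⟨hp, by simpa using hc⟩)]
  · intro ho
    rw [if_pos (by simpa using ho.2)]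
    exact ⟨p, Relation.ReflTransGen.refl, rfl⟩

theorem labD_spec (land : List (List Int)) :
    LabInv land (labD land) ∧ FixL land (labD land) :=
  propagateB_spec land (lab0D land) (LabInv_lab0 land)

-- ==== pure reference for A: frontier BFS over a visited set (no grid mutation) ====

-- body of the neighbour scan (state: visited, nxt, cnt, cols); pure — reads `land` only
def bodyP (land : List (List Int)) (n m : Int)
    (st : PySem.Set (Int × Int) × List (Int × Int) × Int × PySem.Set Int) (p : Int × Int) :
    PySem.Set (Int × Int) × List (Int × Int) × Int × PySem.Set Int :=
  if 0 ≤ p.1 ∧ p.1 < n ∧ 0 ≤ p.2 ∧ p.2 < m ∧ getC land p.1.toNat p.2.toNat == 1 ∧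
      ¬ PySem.Set.contains st.1 p = true then
    (PySem.Set.add st.1 p, st.2.1 ++ [p], st.2.2.1 + 1, PySem.Set.add st.2.2.2 p.2)
  else st

-- one sweep over the current frontier, building the next one
def levelP (land : List (List Int)) (n m : Int) (vis : PySem.Set (Int × Int))
    (frontier : List (Int × Int)) (cnt : Int) (cols : PySem.Set Int) :
    PySem.Set (Int × Int) × List (Int × Int) × Int × PySem.Set Int :=
  frontier.foldl (fun st p => (nbrsB p.1 p.2).foldl (bodyP land n m) st) (vis, [], cnt, cols)

def allCells (n m : Nat) : List (Int × Int) :=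
  (List.range n).flatMap (fun i => (List.range m).map (fun j => (Int.ofNat i, Int.ofNat j)))

def unvisCount (land : List (List Int)) (n m : Nat) (vis : PySem.Set (Int × Int)) : Nat :=
  ((allCells n m).filter
    (fun p => getC land p.1.toNat p.2.toNat == 1 && !(PySem.Set.contains vis p))).length

theorem contains_add {α : Type} [BEq α] [LawfulBEq α] (s : PySem.Set α) (x y : α) :
    PySem.Set.contains (PySem.Set.add s x) y = (PySem.Set.contains s y || y == x) := by
  simp only [PySem.Set.contains]
  rw [Bool.eq_iff_iff]
  simp [PySem.Set.mem_add]

theorem filter_len_add {α : Type} [BEq α] [LawfulBEq α] (pred : α → Bool)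
    (vis : PySem.Set α) (p : α) (l : List α) (hl : l.Nodup) (hp : p ∈ l)
    (hpred : pred p = true) (hvis : PySem.Set.contains vis p = false) :
    (l.filter (fun q => pred q && !(PySem.Set.contains (PySem.Set.add vis p) q))).length + 1 =
      (l.filter (fun q => pred q && !(PySem.Set.contains vis q))).length := by
  induction l with
  | nil => simp at hp
  | cons a t ih =>
    have hnd := (List.nodup_cons.mp hl)
    rcases List.mem_cons.mp hp with rfl | hpt
    · have hfa : ∀ q ∈ t, PySem.Set.contains (PySem.Set.add vis p) q = PySem.Set.contains vis q := by
        intro q hq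
        rw [contains_add]
        have : (q == p) = false := by
          simp only [beq_eq_false_iff_ne]
          rintro rfl; exact hnd.1 hq
        simp [this]
      have hfil : t.filter (fun q => pred q && !(PySem.Set.contains (PySem.Set.add vis p) q)) =
          t.filter (fun q => pred q && !(PySem.Set.contains vis q)) := by
        apply List.filter_congr
        intro q hq; rw [hfa q hq]
      have hca : PySem.Set.contains (PySem.Set.add vis p) p = true := by
        rw [contains_add]; simp
      rw [List.filter_cons, List.filter_cons]
      simp only [hca, hvis, hpred, Bool.not_true, Bool.not_false, Bool.and_false,
        Bool.and_true, if_false, if_true, reduceIte]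
      rw [hfil]
      simp
    · have ha : PySem.Set.contains (PySem.Set.add vis p) a = PySem.Set.contains vis a := by
        rw [contains_add]
        have : (a == p) = false := by
          simp only [beq_eq_false_iff_ne]
          rintro rfl; exact hnd.1 hpt
        simp [this]
      have hih := ih hnd.2 hpt
      rw [List.filter_cons, List.filter_cons]
      simp only [ha]
      by_cases hb : (pred a && !PySem.Set.contains vis a) = true
      · simp only [hb, if_true, reduceIte, List.length_cons]
        omega
      · simp only [hb, if_false, Bool.false_eq_true, reduceIte]
        omega

theorem nodup_allCells (n m : Nat) : (allCells n m).Nodup := by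
  unfold allCells
  rw [List.nodup_flatMap]
  refine ⟨fun i _ => List.Nodup.map (fun a b h => by simpa using h) List.nodup_range, ?_⟩
  have hpw : List.Pairwise (fun a b => a ≠ b) (List.range n) := List.nodup_range
  apply hpw.imp
  intro a b hab
  simp only [Function.onFun, List.disjoint_left]
  intro x hx hx'
  simp only [List.mem_map] at hx hx'
  obtain ⟨j, _, rfl⟩ := hx
  obtain ⟨j', _, h⟩ := hx'
  exact hab (by simpa using congrArg Prod.fst h.symm)

theorem unvisCount_add (land : List (List Int)) (n m : Nat) (vis : PySem.Set (Int × Int))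
    (p : Int × Int) (hp : p ∈ allCells n m)
    (h1 : getC land p.1.toNat p.2.toNat == 1) (h2 : PySem.Set.contains vis p = false) :
    unvisCount land n m (PySem.Set.add vis p) + 1 = unvisCount land n m vis := by
  unfold unvisCount
  exact filter_len_add (fun q => getC land q.1.toNat q.2.toNat == 1) vis p (allCells n m)
    (nodup_allCells n m) hp h1 h2

theorem mem_allCells (n m : Nat) (p : Int × Int) (h1 : 0 ≤ p.1) (h2 : p.1 < (n : Int))
    (h3 : 0 ≤ p.2) (h4 : p.2 < (m : Int)) : p ∈ allCells n m := by
  simp only [allCells, List.mem_flatMap, List.mem_map, List.mem_range]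
  refine ⟨p.1.toNat, by omega, p.2.toNat, by omega, ?_⟩
  have e1 : Int.ofNat p.1.toNat = p.1 := by
    first | omega | (simp only [Int.ofNat_eq_natCast]; omega) | (simp only [Int.ofNat_eq_coe]; omega)
  have e2 : Int.ofNat p.2.toNat = p.2 := by
    first | omega | (simp only [Int.ofNat_eq_natCast]; omega) | (simp only [Int.ofNat_eq_coe]; omega)
  rw [e1, e2]

def muB (land : List (List Int)) (n m : Int)
    (st : PySem.Set (Int × Int) × List (Int × Int) × Int × PySem.Set Int) : Nat :=
  5 * unvisCount land n.toNat m.toNat st.1 + st.2.1.length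

theorem muB_bodyP (land : List (List Int)) (n m : Int)
    (st : PySem.Set (Int × Int) × List (Int × Int) × Int × PySem.Set Int) (p : Int × Int) :
    muB land n m (bodyP land n m st p) ≤ muB land n m st := by
  unfold bodyP
  split
  · rename_i hg
    have hmem : p ∈ allCells n.toNat m.toNat :=
      mem_allCells n.toNat m.toNat p hg.1 (by omega) hg.2.2.1 (by omega)
    have hc : PySem.Set.contains st.1 p = false := by
      have := hg.2.2.2.2.2; simp at this; simp [this]
    have := unvisCount_add land n.toNat m.toNat st.1 p hmem hg.2.2.2.2.1 hc
    simp [muB]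
    omega
  · exact le_refl _

theorem muB_foldl_body (land : List (List Int)) (n m : Int) (l : List (Int × Int))
    (st : PySem.Set (Int × Int) × List (Int × Int) × Int × PySem.Set Int) :
    muB land n m (l.foldl (bodyP land n m) st) ≤ muB land n m st := by
  induction l generalizing st with
  | nil => exact le_refl _
  | cons p t ih => exact le_trans (ih _) (muB_bodyP land n m st p)

theorem muB_foldl_cell (land : List (List Int)) (n m : Int) (fr : List (Int × Int))
    (st : PySem.Set (Int × Int) × List (Int × Int) × Int × PySem.Set Int) :
    muB land n m (fr.foldl (fun st p => (nbrsB p.1 p.2).foldl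
      (bodyP land n m) st) st) ≤ muB land n m st := by
  induction fr generalizing st with
  | nil => exact le_refl _
  | cons p t ih => exact le_trans (ih _) (muB_foldl_body land n m _ st)

theorem muB_levelP (land : List (List Int)) (n m : Int) (vis : PySem.Set (Int × Int))
    (frontier : List (Int × Int)) (cnt : Int) (cols : PySem.Set Int) :
    muB land n m (levelP land n m vis frontier cnt cols) ≤
      5 * unvisCount land n.toNat m.toNat vis := by
  have := muB_foldl_cell land n m frontier (vis, [], cnt, cols)
  simpa [levelP, muB] using this

-- while frontier: … frontier = nxt
def bfsP (land : List (List Int)) (n m : Int) (vis : PySem.Set (Int × Int))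
    (frontier : List (Int × Int)) (cnt : Int) (cols : PySem.Set Int) :
    PySem.Set (Int × Int) × Int × PySem.Set Int :=
  if h : frontier = [] then (vis, cnt, cols)
  else
    let s := levelP land n m vis frontier cnt cols
    bfsP land n m s.1 s.2.1 s.2.2.1 s.2.2.2
termination_by 5 * unvisCount land n.toNat m.toNat vis + frontier.length
decreasing_by
  have hmu := muB_levelP land n m vis frontier cnt cols
  have hfr : 1 ≤ frontier.length := by
    cases frontier with
    | nil => exact absurd rfl h
    | cons a t => simp
  simp only [muB] at hmu
  omega

-- the scan body of the reference (state: visited, dic) — dic updates copied from cellA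
def cellP (land : List (List Int)) (n m : Int)
    (st : PySem.Set (Int × Int) × PySem.Dict Int Int) (i j : Int) :
    PySem.Set (Int × Int) × PySem.Dict Int Int :=
  if getC land i.toNat j.toNat == 1 ∧ ¬ PySem.Set.contains st.1 (i, j) = true then
    let r := bfsP land n m (PySem.Set.add st.1 (i, j)) [(i, j)] 1
      (PySem.Set.add PySem.Set.empty j)
    (r.1, r.2.2.foldl (fun d c => PySem.Dict.modify d c 0 (· + r.2.1)) st.2)
  else st

def scanP (land : List (List Int)) : PySem.Set (Int × Int) × PySem.Dict Int Int :=
  (PySem.List.pyRange 0 (NI land) 1).foldl (fun st i =>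
      (PySem.List.pyRange 0 (MI land) 1).foldl
        (fun st j => cellP land (NI land) (MI land) st i j) st)
    (PySem.Set.empty, PySem.Dict.empty)

def solP (land : List (List Int)) : Int :=
  match PySem.List.max? (PySem.Dict.keys (scanP land).2)
      (fun k => PySem.Dict.getD (scanP land).2 k 0) with
  | some k => PySem.Dict.getD (scanP land).2 k 0
  | none => 0

-- ==== simulation: the mutating port of A equals the pure reference ====

-- masking: the original grid with every visited cell overwritten by -1 (A's mutated land)
def mask (land : List (List Int)) (vis : PySem.Set (Int × Int)) : List (List Int) :=
  land.mapIdx (fun i row => row.mapIdx (fun j v =>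
    if PySem.Set.contains vis (Int.ofNat i, Int.ofNat j) then -1 else v))

theorem getD_def {α : Type} (l : List α) (i : Nat) (d : α) : l.getD i d = (l[i]?).getD d := rfl

theorem getC_oob (land : List (List Int)) (i j : Nat)
    (h : ¬ (i < land.length ∧ j < (land.getD i []).length)) : getC land i j = 0 := by
  unfold getC
  simp only [getD_def] at h ⊢
  cases hrow : land[i]? with
  | none => simp [hrow]
  | some row =>
    have hi : i < land.length := (List.getElem?_eq_some_iff.mp hrow).1
    rw [hrow] at h
    simp only [Option.getD_some] at h ⊢
    have hj : row.length ≤ j := by omega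
    rw [List.getElem?_eq_none hj]
    rfl

theorem getC_mask (land : List (List Int)) (vis : PySem.Set (Int × Int)) (i j : Nat) :
    getC (mask land vis) i j =
      if PySem.Set.contains vis (Int.ofNat i, Int.ofNat j) = true ∧ i < land.length ∧
          j < (land.getD i []).length then -1 else getC land i j := by
  unfold mask getC
  simp only [getD_def, List.getElem?_mapIdx]
  cases hrow : land[i]? with
  | none =>
    have hi : land.length ≤ i := List.getElem?_eq_none_iff.mp hrow
    simp
    try omega
  | some row =>
    have hi : i < land.length := (List.getElem?_eq_some_iff.mp hrow).1
    simp only [Option.map_some, Option.getD_some, List.getElem?_mapIdx]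
    cases hcell : row[j]? with
    | none =>
      have hj : row.length ≤ j := List.getElem?_eq_none_iff.mp hcell
      have hrl : ((some row).getD ([] : List Int)).length = row.length := rfl
      simp
      omega
    | some v =>
      have hj : j < row.length := (List.getElem?_eq_some_iff.mp hcell).1
      simp only [Option.map_some, Option.getD_some]
      split_ifs with h1 h2 h2 <;> simp_all

theorem guard_mask (land : List (List Int)) (vis : PySem.Set (Int × Int)) (i j : Nat) :
    (getC (mask land vis) i j == 1) =
      (getC land i j == 1 && !(PySem.Set.contains vis (Int.ofNat i, Int.ofNat j))) := by
  rw [getC_mask]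
  split
  · rename_i h
    rw [h.1]
    simp
  · rename_i h
    by_cases hc : PySem.Set.contains vis (Int.ofNat i, Int.ofNat j) = true
    · have hoob : ¬ (i < land.length ∧ j < (land.getD i []).length) := fun hh => h ⟨hc, hh⟩
      rw [getC_oob land i j hoob, hc]
      simp
    · simp only [Bool.not_eq_true] at hc
      rw [hc]
      simp

theorem setC_mask (land : List (List Int)) (vis : PySem.Set (Int × Int)) (i j : Nat) :
    setC (mask land vis) i j (-1) =
      mask land (PySem.Set.add vis (Int.ofNat i, Int.ofNat j)) := by
  unfold setC
  apply List.ext_getElem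
  · simp [mask]
  intro a ha1 ha2
  have hal : a < land.length := by simpa [mask] using ha2
  rw [List.getElem_set]
  by_cases hai : i = a
  · subst hai
    rw [if_pos rfl]
    have hrow : (mask land vis).getD i [] = List.mapIdx
        (fun jj v => if PySem.Set.contains vis (Int.ofNat i, Int.ofNat jj) = true
          then -1 else v) land[i] := by
      rw [getD_def, List.getElem?_eq_getElem (by simpa [mask] using hal)]
      simp [mask, List.getElem_mapIdx]
    rw [hrow]
    have hmr : (mask land (PySem.Set.add vis (Int.ofNat i, Int.ofNat j)))[i]'ha2 =
        List.mapIdx (fun jj v => if PySem.Set.contains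
          (PySem.Set.add vis (Int.ofNat i, Int.ofNat j)) (Int.ofNat i, Int.ofNat jj) = true
          then -1 else v) land[i] := by
      simp [mask, List.getElem_mapIdx]
    rw [hmr]
    apply List.ext_getElem
    · simp
    intro b hb1 hb2
    simp only [List.length_set, List.length_mapIdx] at hb1 hb2
    rw [List.getElem_set, List.getElem_mapIdx, List.getElem_mapIdx, contains_add]
    by_cases hjb : j = b
    · subst hjb
      rw [if_pos rfl]
      have : ((Int.ofNat i, Int.ofNat j) == (Int.ofNat i, Int.ofNat j)) = true := by simp
      rw [this]
      simp
    · have hbne : ((Int.ofNat i, Int.ofNat b) == (Int.ofNat i, Int.ofNat j)) = false := by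
        simp only [beq_eq_false_iff_ne]
        intro hh
        exact hjb (by simpa using congrArg Prod.snd hh.symm)
      rw [if_neg (by omega), hbne]
      simp
  · rw [if_neg hai]
    have hmv : a < (mask land vis).length := by simpa [mask] using hal
    have h1 : (mask land vis)[a]'hmv = List.mapIdx
        (fun jj v => if PySem.Set.contains vis (Int.ofNat a, Int.ofNat jj) = true
          then -1 else v) land[a] := by
      simp [mask, List.getElem_mapIdx]
    have h2 : (mask land (PySem.Set.add vis (Int.ofNat i, Int.ofNat j)))[a]'ha2 =
        List.mapIdx (fun jj v => if PySem.Set.contains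
          (PySem.Set.add vis (Int.ofNat i, Int.ofNat j)) (Int.ofNat a, Int.ofNat jj) = true
          then -1 else v) land[a] := by
      simp [mask, List.getElem_mapIdx]
    rw [h1, h2]
    apply List.ext_getElem
    · simp
    intro b hb1 hb2
    rw [List.getElem_mapIdx, List.getElem_mapIdx, contains_add]
    have hbne : ((Int.ofNat a, Int.ofNat b) == (Int.ofNat i, Int.ofNat j)) = false := by
      simp only [beq_eq_false_iff_ne]
      intro hh
      have h5 := congrArg Prod.fst hh
      simp at h5
      exact hai h5.symm
    rw [hbne]
    simp

theorem mask_empty (land : List (List Int)) : mask land PySem.Set.empty = land := by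
  apply List.ext_getElem
  · simp [mask]
  intro a ha1 ha2
  simp only [mask, List.getElem_mapIdx]
  apply List.ext_getElem
  · simp
  intro b hb1 hb2
  simp only [List.getElem_mapIdx]
  have : PySem.Set.contains (PySem.Set.empty : PySem.Set (Int × Int))
      (Int.ofNat a, Int.ofNat b) = false := by
    simp [PySem.Set.contains, PySem.Set.empty]
  simp [this]

theorem bodySim (land : List (List Int)) (n m x y ni nj : Int)
    (v : PySem.Set (Int × Int)) (q : List (Int × Int)) (c : Int) (cl : PySem.Set Int)
    (d : Int × Int) (h1 : x + d.1 = ni) (h2 : y + d.2 = nj) :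
    bodyA n m x y (mask land v, q, c, cl) d =
      (fun s => (mask land s.1, s.2.1, s.2.2.1, s.2.2.2))
        (bodyP land n m (v, q, c, cl) (ni, nj)) := by
  subst h1 h2
  unfold bodyA bodyP
  dsimp only
  by_cases h0 : 0 ≤ x + d.1 ∧ x + d.1 < n ∧ 0 ≤ y + d.2 ∧ y + d.2 < m
  · have e1 : Int.ofNat (x + d.1).toNat = x + d.1 := by
      first | omega | (simp only [Int.ofNat_eq_natCast]; omega)
    have e2 : Int.ofNat (y + d.2).toNat = y + d.2 := by
      first | omega | (simp only [Int.ofNat_eq_natCast]; omega)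
    have hg := guard_mask land v (x + d.1).toNat (y + d.2).toNat
    rw [e1, e2] at hg
    by_cases hL : (getC land (x + d.1).toNat (y + d.2).toNat == 1) = true
    · by_cases hC : PySem.Set.contains v (x + d.1, y + d.2) = true
      · rw [if_neg (fun hh => by have hb := hh.2.2.2.2; rw [hg, hL, hC] at hb; simp at hb),
          if_neg (fun hh => hh.2.2.2.2.2 hC)]
      · simp only [Bool.not_eq_true] at hC
        rw [if_pos ⟨h0.1, h0.2.1, h0.2.2.1, h0.2.2.2, by rw [hg, hL, hC]; simp⟩,
          if_pos ⟨h0.1, h0.2.1, h0.2.2.1, h0.2.2.2, hL, by rw [hC]; simp⟩]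
        have hs := setC_mask land v (x + d.1).toNat (y + d.2).toNat
        rw [e1, e2] at hs
        rw [hs]
    · simp only [Bool.not_eq_true] at hL
      rw [if_neg (fun hh => by have hb := hh.2.2.2.2; rw [hg, hL] at hb; simp at hb),
        if_neg (fun hh => by have hb := hh.2.2.2.2.1; rw [hL] at hb; simp at hb)]
  · rw [if_neg (fun hh => h0 ⟨hh.1, hh.2.1, hh.2.2.1, hh.2.2.2.1⟩),
      if_neg (fun hh => h0 ⟨hh.1, hh.2.1, hh.2.2.1, hh.2.2.2.1⟩)]

theorem stepSim (land : List (List Int)) (n m x y : Int)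
    (v : PySem.Set (Int × Int)) (q : List (Int × Int)) (c : Int) (cl : PySem.Set Int) :
    stepA n m (mask land v) q x y c cl =
      (fun s => (mask land s.1, s.2.1, s.2.2.1, s.2.2.2))
        ((nbrsB x y).foldl (bodyP land n m) (v, q, c, cl)) := by
  unfold stepA dirsA nbrsB
  simp only [List.foldl_cons, List.foldl_nil]
  rw [bodySim land n m x y (x + 1) y v q c cl (1, 0) (by ring) (by ring)]
  dsimp only
  rw [bodySim land n m x y (x - 1) y _ _ _ _ ((-1 : Int), (0 : Int)) (by ring) (by ring)]
  dsimp only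
  rw [bodySim land n m x y x (y + 1) _ _ _ _ ((0 : Int), (1 : Int)) (by ring) (by ring)]
  dsimp only
  rw [bodySim land n m x y x (y - 1) _ _ _ _ ((0 : Int), (-1 : Int)) (by ring) (by ring)]

theorem levelSim (land : List (List Int)) (n m : Int) (fr : List (Int × Int)) :
    ∀ (v : PySem.Set (Int × Int)) (q : List (Int × Int)) (c : Int) (cl : PySem.Set Int),
    fr.foldl (fun st p => stepA n m st.1 st.2.1 p.1 p.2 st.2.2.1 st.2.2.2)
        (mask land v, q, c, cl) =
      (fun s => (mask land s.1, s.2.1, s.2.2.1, s.2.2.2))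
        (fr.foldl (fun st p => (nbrsB p.1 p.2).foldl (bodyP land n m) st) (v, q, c, cl)) := by
  induction fr with
  | nil => intro v q c cl; rfl
  | cons p t ih =>
    intro v q c cl
    simp only [List.foldl_cons]
    show t.foldl _ (stepA n m (mask land v) q p.1 p.2 c cl) = _
    rw [stepSim]
    exact ih _ _ _ _

theorem stepA_pre (n m x y : Int) (pre : List (Int × Int)) :
    ∀ (g : List (List Int)) (q : List (Int × Int)) (c : Int) (cl : PySem.Set Int),
    stepA n m g (pre ++ q) x y c cl =
      (fun r => (r.1, pre ++ r.2.1, r.2.2.1, r.2.2.2)) (stepA n m g q x y c cl) := by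
  suffices h : ∀ (l : List (Int × Int)) (g : List (List Int)) (q : List (Int × Int))
      (c : Int) (cl : PySem.Set Int),
      l.foldl (bodyA n m x y) (g, pre ++ q, c, cl) =
        (fun r => (r.1, pre ++ r.2.1, r.2.2.1, r.2.2.2)) (l.foldl (bodyA n m x y) (g, q, c, cl)) by
    intro g q c cl
    exact h dirsA g q c cl
  intro l
  induction l with
  | nil => intro g q c cl; rfl
  | cons d t ih =>
    intro g q c cl
    simp only [List.foldl_cons]
    unfold bodyA
    dsimp only
    split
    · rw [List.append_assoc]
      exact ih _ _ _ _
    · exact ih _ _ _ _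

theorem bfsA_run (n m : Int) : ∀ (xs acc : List (Int × Int)) (g : List (List Int))
    (cnt : Int) (col : PySem.Set Int),
    bfsA n m g (xs ++ acc) cnt col =
      (fun r => bfsA n m r.1 r.2.1 r.2.2.1 r.2.2.2)
        (xs.foldl (fun st p => stepA n m st.1 st.2.1 p.1 p.2 st.2.2.1 st.2.2.2)
          (g, acc, cnt, col)) := by
  intro xs
  induction xs with
  | nil => intro acc g cnt col; rfl
  | cons p t ih =>
    intro acc g cnt col
    obtain ⟨x, y⟩ := p
    show bfsA n m g ((x, y) :: (t ++ acc)) cnt col = _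
    rw [bfsA]
    rw [stepA_pre n m x y t g acc cnt col]
    dsimp only
    rw [ih]
    rfl

theorem floodSim (land : List (List Int)) (n m : Int) :
    ∀ (vis : PySem.Set (Int × Int)) (fr : List (Int × Int)) (cnt : Int) (cols : PySem.Set Int),
    bfsA n m (mask land vis) fr cnt cols =
      (fun r => (mask land r.1, r.2.1, r.2.2)) (bfsP land n m vis fr cnt cols) := by
  intro vis fr cnt cols
  induction vis, fr, cnt, cols using bfsP.induct land n m with
  | case1 vis cnt cols =>
    rw [bfsA, bfsP]
    rfl
  | case2 vis fr cnt cols h s ih =>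
    have hsplit := bfsA_run n m fr [] (mask land vis) cnt cols
    rw [List.append_nil] at hsplit
    rw [hsplit, levelSim land n m fr vis [] cnt cols]
    dsimp only
    have hlb : fr.foldl (fun st p => (nbrsB p.1 p.2).foldl (bodyP land n m) st)
        (vis, [], cnt, cols) = levelP land n m vis fr cnt cols := rfl
    rw [hlb]
    rw [ih]
    conv_rhs => rw [bfsP]
    rw [dif_neg h]

theorem cellSim (land : List (List Int)) (n m : Int) (i j : Int) (hi : 0 ≤ i) (hj : 0 ≤ j)
    (vis : PySem.Set (Int × Int)) (dic : PySem.Dict Int Int) :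
    cellA n m (mask land vis, dic) i j =
      (fun s => (mask land s.1, s.2)) (cellP land n m (vis, dic) i j) := by
  unfold cellA cellP
  dsimp only
  have hg := guard_mask land vis i.toNat j.toNat
  have e1 : Int.ofNat i.toNat = i := by
    first | omega | (simp only [Int.ofNat_eq_natCast]; omega)
  have e2 : Int.ofNat j.toNat = j := by
    first | omega | (simp only [Int.ofNat_eq_natCast]; omega)
  rw [e1, e2] at hg
  by_cases hL : (getC land i.toNat j.toNat == 1) = true
  · by_cases hC : PySem.Set.contains vis (i, j) = true
    · rw [if_neg (fun hh => by rw [hg, hL, hC] at hh; simp at hh),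
        if_neg (fun hh => hh.2 hC)]
    · simp only [Bool.not_eq_true] at hC
      rw [if_pos (by rw [hg, hL, hC]; simp), if_pos ⟨hL, by rw [hC]; simp⟩]
      have hs := setC_mask land vis i.toNat j.toNat
      rw [e1, e2] at hs
      rw [hs]
      rw [floodSim land n m (PySem.Set.add vis (i, j)) [(i, j)] 1
        (PySem.Set.add PySem.Set.empty j)]
  · simp only [Bool.not_eq_true] at hL
    rw [if_neg (fun hh => by rw [hg, hL] at hh; simp at hh),
      if_neg (fun hh => by rw [hL] at hh; simp at hh)]

theorem foldl_rel2 {α βA βB : Type} (R : βA → βB → Prop) (fA : βA → α → βA)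
    (fB : βB → α → βB) : ∀ (l : List α), (∀ x ∈ l, ∀ a b, R a b → R (fA a x) (fB b x)) →
    ∀ a b, R a b → R (l.foldl fA a) (l.foldl fB b) := by
  intro l
  induction l with
  | nil => intro _ a b h; exact h
  | cons x t ih =>
    intro hstep a b h
    exact ih (fun x' hx' => hstep x' (List.mem_cons_of_mem x hx'))
      _ _ (hstep x List.mem_cons_self a b h)

theorem solution_eq_solP (land : List (List Int)) : solution land = solP land := by
  unfold solution solP scanP NI MI
  dsimp only
  have hrel := foldl_rel2
    (fun (a : List (List Int) × PySem.Dict Int Int)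
         (b : PySem.Set (Int × Int) × PySem.Dict Int Int) =>
      a.1 = mask land b.1 ∧ a.2 = b.2)
    (fun st i => (PySem.List.pyRange 0 (((land.headD []).length : Int)) 1).foldl
      (fun st j => cellA ((land.length : Int)) (((land.headD []).length : Int)) st i j) st)
    (fun st i => (PySem.List.pyRange 0 (((land.headD []).length : Int)) 1).foldl
      (fun st j => cellP land ((land.length : Int)) (((land.headD []).length : Int)) st i j) st)
    (PySem.List.pyRange 0 ((land.length : Int)) 1)
    (by
      intro i him a b hR
      obtain ⟨hi0, _⟩ := PySem.List.mem_pyRange_one.mp him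
      refine foldl_rel2
        (fun (a : List (List Int) × PySem.Dict Int Int)
             (b : PySem.Set (Int × Int) × PySem.Dict Int Int) =>
          a.1 = mask land b.1 ∧ a.2 = b.2) _ _ _ ?_ a b hR
      intro j hjm a' b' hR'
      obtain ⟨hj0, _⟩ := PySem.List.mem_pyRange_one.mp hjm
      obtain ⟨gA, dic⟩ := a'
      obtain ⟨vis, dic2⟩ := b'
      obtain ⟨h1, h2⟩ := hR'
      dsimp only at h1 h2 ⊢
      subst h1
      cases h2
      rw [cellSim land ((land.length : Int)) (((land.headD []).length : Int)) i j hi0 hj0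
        vis dic]
      exact ⟨rfl, rfl⟩)
    (land, PySem.Dict.empty) (PySem.Set.empty, PySem.Dict.empty)
    ⟨by rw [mask_empty], rfl⟩
  rw [hrel.2]

-- ==== BFS correctness: the reference BFS collects exactly one connected component ====

theorem contains_iff_mem {α : Type} [BEq α] [LawfulBEq α] (s : PySem.Set α) (x : α) :
    PySem.Set.contains s x = true ↔ x ∈ s := by
  simp [PySem.Set.contains]

theorem set_add_of_not_mem {α : Type} [BEq α] [LawfulBEq α] (s : PySem.Set α) (x : α)
    (h : x ∉ s) : PySem.Set.add s x = s ++ [x] := by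
  simp [PySem.Set.add, h]

theorem set_add_nodup {α : Type} [BEq α] [LawfulBEq α] (s : PySem.Set α) (x : α)
    (h : s.Nodup) : (PySem.Set.add s x).Nodup := by
  unfold PySem.Set.add
  split
  · exact h
  · rename_i hc
    have hx : x ∉ s := fun hm => hc ((contains_iff_mem s x).mpr hm)
    refine List.Nodup.append h (List.nodup_singleton x) ?_
    intro a ha hax
    exact hx (by rwa [List.mem_singleton.mp hax] at ha)

def VisClosed (land : List (List Int)) (V : PySem.Set (Int × Int)) : Prop :=
  (∀ p, p ∈ V → oilP land p) ∧
  (∀ p q, p ∈ V → adjP land p q → q ∈ V)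

theorem visClosed_reach (land : List (List Int)) (V : PySem.Set (Int × Int))
    (hV : VisClosed land V) {p q : Int × Int} (hp : p ∈ V) (h : ReachP land p q) : q ∈ V := by
  induction h with
  | refl => exact hp
  | tail _ hadj ih => exact hV.2 _ _ ih hadj

-- the BFS invariant; S := st.1.drop V.length is the set of cells of the current component
-- discovered so far (st = (vis, nxt, cnt, cols), P = the part of the frontier still to do)
def BInv (land : List (List Int)) (s : Int × Int) (V : PySem.Set (Int × Int))
    (P : List (Int × Int))
    (st : PySem.Set (Int × Int) × List (Int × Int) × Int × PySem.Set Int) : Prop :=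
  st.1 = V ++ st.1.drop V.length ∧ st.1.Nodup ∧ s ∈ st.1.drop V.length ∧
  (∀ p ∈ st.1.drop V.length, ReachP land s p) ∧
  st.2.2.1 = ((st.1.drop V.length).length : Int) ∧
  (∀ c, c ∈ st.2.2.2 ↔ ∃ p ∈ st.1.drop V.length, p.2 = c) ∧ st.2.2.2.Nodup ∧
  (∀ p ∈ st.1.drop V.length,
    (p ∈ P ∨ p ∈ st.2.1) ∨ ∀ q, adjP land p q → q ∈ st.1) ∧
  (∀ p ∈ st.2.1, p ∈ st.1.drop V.length) ∧ (∀ p ∈ P, p ∈ st.1.drop V.length)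

theorem bodyP_vis_mono (land : List (List Int)) (n m : Int)
    (st : PySem.Set (Int × Int) × List (Int × Int) × Int × PySem.Set Int) (ab : Int × Int)
    {q : Int × Int} (h : q ∈ st.1) : q ∈ (bodyP land n m st ab).1 := by
  unfold bodyP
  split
  · exact (PySem.Set.mem_add st.1 ab q).mpr (Or.inl h)
  · exact h

theorem foldl_bodyP_vis_mono (land : List (List Int)) (n m : Int) (l : List (Int × Int)) :
    ∀ (st : PySem.Set (Int × Int) × List (Int × Int) × Int × PySem.Set Int) {q : Int × Int},
    q ∈ st.1 → q ∈ (l.foldl (bodyP land n m) st).1 := by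
  induction l with
  | nil => intro st q h; exact h
  | cons ab t ih =>
    intro st q h
    exact ih _ (bodyP_vis_mono land n m st ab h)

theorem bodyP_adds (land : List (List Int))
    (st : PySem.Set (Int × Int) × List (Int × Int) × Int × PySem.Set Int) (ab : Int × Int)
    (hab : oilP land ab) : ab ∈ (bodyP land (NI land) (MI land) st ab).1 := by
  unfold bodyP
  by_cases hc : PySem.Set.contains st.1 ab = true
  · rw [if_neg (fun hh => hh.2.2.2.2.2 hc)]
    exact (contains_iff_mem _ _).mp hc
  · rw [if_pos ⟨hab.1.1, hab.1.2.1, hab.1.2.2.1, hab.1.2.2.2, by simpa using hab.2, hc⟩]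
    exact (PySem.Set.mem_add st.1 ab ab).mpr (Or.inr rfl)

theorem nbrs_fold_covers (land : List (List Int)) (l : List (Int × Int)) :
    ∀ (st : PySem.Set (Int × Int) × List (Int × Int) × Int × PySem.Set Int),
    ∀ ab ∈ l, oilP land ab →
      ab ∈ (l.foldl (bodyP land (NI land) (MI land)) st).1 := by
  induction l with
  | nil => intro st ab h; simp at h
  | cons hd t ih =>
    intro st ab hab ho
    rcases List.mem_cons.mp hab with rfl | hmt
    · simp only [List.foldl_cons]
      exact foldl_bodyP_vis_mono land (NI land) (MI land) t _ (bodyP_adds land st ab ho)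
    · simp only [List.foldl_cons]
      exact ih _ ab hmt ho

theorem bodyP_pres (land : List (List Int)) (s hc : Int × Int) (V : PySem.Set (Int × Int))
    (P : List (Int × Int))
    (st : PySem.Set (Int × Int) × List (Int × Int) × Int × PySem.Set Int) (ab : Int × Int)
    (hbi : BInv land s V P st) (hhc : hc ∈ st.1.drop V.length)
    (hab : ab ∈ nbrsB hc.1 hc.2) (hs : oilP land s) :
    BInv land s V P (bodyP land (NI land) (MI land) st ab) ∧
      hc ∈ (bodyP land (NI land) (MI land) st ab).1.drop V.length := by
  obtain ⟨h1, h2, h3, h4, h5, h6, h7, h8, h9, h10⟩ := hbi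
  unfold bodyP
  split
  · rename_i hg
    have habo : oilP land ab := ⟨⟨hg.1, hg.2.1, hg.2.2.1, hg.2.2.2.1⟩, by
      have := hg.2.2.2.2.1; simpa using this⟩
    have habm : ab ∉ st.1 := by
      intro hmem
      exact hg.2.2.2.2.2 ((contains_iff_mem _ _).mpr hmem)
    have hadd : PySem.Set.add st.1 ab = st.1 ++ [ab] := set_add_of_not_mem _ _ habm
    have hVlen : V.length ≤ st.1.length := by
      have := congrArg List.length h1
      simp only [List.length_append] at this
      omega
    have hdropadd : (st.1 ++ [ab]).drop V.length = st.1.drop V.length ++ [ab] := by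
      rw [List.drop_append_of_le_length hVlen]
    have hhco : oilP land hc := reach_oil land (h4 hc hhc) hs
    have hadjab : adjP land hc ab := ⟨hhco, habo, hab⟩
    refine ⟨⟨?_, ?_, ?_, ?_, ?_, ?_, ?_, ?_, ?_, ?_⟩, ?_⟩
    · dsimp only
      rw [hadd, hdropadd, ← List.append_assoc, ← h1]
    · exact set_add_nodup _ _ h2
    · dsimp only
      rw [hadd, hdropadd]
      exact List.mem_append_left _ h3
    · dsimp only
      rw [hadd, hdropadd]
      intro p hp
      rcases List.mem_append.mp hp with hp1 | hp2
      · exact h4 p hp1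
      · rw [List.mem_singleton.mp hp2]
        exact Relation.ReflTransGen.tail (h4 hc hhc) hadjab
    · dsimp only
      rw [hadd, hdropadd]
      simp only [List.length_append, List.length_singleton]
      push_cast
      omega
    · dsimp only
      intro c
      rw [hadd, hdropadd, PySem.Set.mem_add]
      constructor
      · rintro (hin | rfl)
        · obtain ⟨p, hp, he⟩ := (h6 c).mp hin
          exact ⟨p, List.mem_append_left _ hp, he⟩
        · exact ⟨ab, List.mem_append_right _ (List.mem_singleton_self _), rfl⟩
      · rintro ⟨p, hp, he⟩
        rcases List.mem_append.mp hp with hp1 | hp2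
        · exact Or.inl ((h6 c).mpr ⟨p, hp1, he⟩)
        · rw [List.mem_singleton.mp hp2] at he
          exact Or.inr he.symm
    · exact set_add_nodup _ _ h7
    · dsimp only
      rw [hadd, hdropadd]
      intro p hp
      rcases List.mem_append.mp hp with hp1 | hp2
      · rcases h8 p hp1 with (hin | hclosed)
        · exact Or.inl (Or.imp_right (fun hx => List.mem_append_left _ hx) hin)
        · exact Or.inr (fun q hq => List.mem_append_left _ (hclosed q hq))
      · rw [List.mem_singleton.mp hp2]
        exact Or.inl (Or.inr (List.mem_append_right _ (List.mem_singleton_self _)))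
    · dsimp only
      rw [hadd, hdropadd]
      intro p hp
      rcases List.mem_append.mp hp with hp1 | hp2
      · exact List.mem_append_left _ (h9 p hp1)
      · exact List.mem_append_right _ hp2
    · dsimp only
      rw [hadd, hdropadd]
      intro p hp
      exact List.mem_append_left _ (h10 p hp)
    · dsimp only
      rw [hadd, hdropadd]
      exact List.mem_append_left _ hhc
  · exact ⟨⟨h1, h2, h3, h4, h5, h6, h7, h8, h9, h10⟩, hhc⟩

theorem nbrs_fold_pres (land : List (List Int)) (s hc : Int × Int)
    (V : PySem.Set (Int × Int)) (P : List (Int × Int)) (l : List (Int × Int))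
    (hl : ∀ ab ∈ l, ab ∈ nbrsB hc.1 hc.2) (hs : oilP land s) :
    ∀ st, BInv land s V P st → hc ∈ st.1.drop V.length →
      BInv land s V P (l.foldl (bodyP land (NI land) (MI land)) st) ∧
        hc ∈ (l.foldl (bodyP land (NI land) (MI land)) st).1.drop V.length := by
  induction l with
  | nil => intro st h hhc; exact ⟨h, hhc⟩
  | cons ab t ih =>
    intro st h hhc
    have hstep := bodyP_pres land s hc V P st ab h hhc (hl ab List.mem_cons_self) hs
    exact ih (fun x hx => hl x (List.mem_cons_of_mem _ hx)) _ hstep.1 hstep.2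

theorem level_fold_pres (land : List (List Int)) (s : Int × Int)
    (V : PySem.Set (Int × Int)) (todo : List (Int × Int)) (hs : oilP land s) :
    ∀ st, BInv land s V todo st →
      BInv land s V []
        (todo.foldl (fun st p => (nbrsB p.1 p.2).foldl (bodyP land (NI land) (MI land)) st)
          st) := by
  induction todo with
  | nil =>
    intro st h
    obtain ⟨h1, h2, h3, h4, h5, h6, h7, h8, h9, h10⟩ := h
    exact ⟨h1, h2, h3, h4, h5, h6, h7, h8, h9, by intro p hp; simp at hp⟩
  | cons hc rest ih =>
    intro st h
    have hhc : hc ∈ st.1.drop V.length := h.2.2.2.2.2.2.2.2.2 hc List.mem_cons_self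
    have hstep := nbrs_fold_pres land s hc V (hc :: rest) (nbrsB hc.1 hc.2)
      (fun ab hab => hab) hs st h hhc
    set st' := (nbrsB hc.1 hc.2).foldl (bodyP land (NI land) (MI land)) st with hst'
    have hcovers : ∀ q, adjP land hc q → q ∈ st'.1 := by
      intro q hq
      exact nbrs_fold_covers land (nbrsB hc.1 hc.2) st q hq.2.2 hq.2.1
    obtain ⟨⟨h1, h2, h3, h4, h5, h6, h7, h8, h9, h10⟩, hhc'⟩ := hstep
    simp only [List.foldl_cons]
    apply ih
    refine ⟨h1, h2, h3, h4, h5, h6, h7, ?_, h9, ?_⟩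
    · intro p hp
      by_cases hphc : p = hc
      · subst hphc
        exact Or.inr hcovers
      · rcases h8 p hp with (hin | hclosed)
        · rcases hin with hinP | hinN
          · rcases List.mem_cons.mp hinP with heq | hrest
            · exact absurd heq hphc
            · exact Or.inl (Or.inl hrest)
          · exact Or.inl (Or.inr hinN)
        · exact Or.inr hclosed
    · intro p hp
      exact h10 p (List.mem_cons_of_mem _ hp)

theorem bfsP_preserves (land : List (List Int)) (s : Int × Int)
    (V : PySem.Set (Int × Int)) (hs : oilP land s) :
    ∀ vis fr cnt cols, BInv land s V fr (vis, fr, cnt, cols) →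
      BInv land s V []
        ((bfsP land (NI land) (MI land) vis fr cnt cols).1,
          ([] : List (Int × Int)),
          (bfsP land (NI land) (MI land) vis fr cnt cols).2.1,
          (bfsP land (NI land) (MI land) vis fr cnt cols).2.2) ∧
      (∀ p ∈ (bfsP land (NI land) (MI land) vis fr cnt cols).1.drop V.length,
        ∀ q, adjP land p q → q ∈ (bfsP land (NI land) (MI land) vis fr cnt cols).1) := by
  intro vis fr cnt cols
  induction vis, fr, cnt, cols using bfsP.induct land (NI land) (MI land) with
  | case1 vis cnt cols =>
    intro h
    rw [bfsP]
    simp only [dite_true]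
    obtain ⟨h1, h2, h3, h4, h5, h6, h7, h8, h9, h10⟩ := h
    refine ⟨⟨h1, h2, h3, h4, h5, h6, h7, ?_, by intro p hp; simp at hp,
      by intro p hp; simp at hp⟩, ?_⟩
    · intro p hp
      rcases h8 p hp with (hin | hclosed)
      · rcases hin with h' | h' <;> simp at h'
      · exact Or.inr hclosed
    · intro p hp q hq
      rcases h8 p hp with (hin | hclosed)
      · rcases hin with h' | h' <;> simp at h'
      · exact hclosed q hq
  | case2 vis fr cnt cols hne s' ih =>
    intro h
    rw [bfsP, dif_neg hne]
    have hlv : BInv land s V [] (levelP land (NI land) (MI land) vis fr cnt cols) := by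
      apply level_fold_pres land s V fr hs
      obtain ⟨h1, h2, h3, h4, h5, h6, h7, h8, h9, h10⟩ := h
      exact ⟨h1, h2, h3, h4, h5, h6, h7,
        by intro p hp; rcases h8 p hp with (hin | hcl)
           · rcases hin with h' | h'
             · exact Or.inl (Or.inl h')
             · exact Or.inl (Or.inl h')
           · exact Or.inr hcl,
        by intro p hp; simp at hp, h9⟩
    obtain ⟨l1, l2, l3, l4, l5, l6, l7, l8, l9, l10⟩ := hlv
    apply ih
    refine ⟨l1, l2, l3, l4, l5, l6, l7, ?_, l9, l9⟩
    intro p hp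
    rcases l8 p hp with (hin | hcl)
    · rcases hin with h' | h'
      · simp at h'
      · exact Or.inl (Or.inl h')
    · exact Or.inr hcl

theorem bfsP_spec (land : List (List Int)) (s : Int × Int) (V : PySem.Set (Int × Int))
    (hVC : VisClosed land V) (hnd : V.Nodup) (hs : oilP land s) (hsV : s ∉ V) :
    ∃ S : List (Int × Int),
      (bfsP land (NI land) (MI land) (PySem.Set.add V s) [s] 1
        (PySem.Set.add PySem.Set.empty s.2)).1 = V ++ S ∧
      (V ++ S).Nodup ∧
      (∀ p, p ∈ S ↔ ReachP land s p) ∧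
      (bfsP land (NI land) (MI land) (PySem.Set.add V s) [s] 1
        (PySem.Set.add PySem.Set.empty s.2)).2.1 = (S.length : Int) ∧
      (∀ c, c ∈ (bfsP land (NI land) (MI land) (PySem.Set.add V s) [s] 1
        (PySem.Set.add PySem.Set.empty s.2)).2.2 ↔ ∃ p, ReachP land s p ∧ p.2 = c) ∧
      (bfsP land (NI land) (MI land) (PySem.Set.add V s) [s] 1
        (PySem.Set.add PySem.Set.empty s.2)).2.2.Nodup := by
  have hadd : PySem.Set.add V s = V ++ [s] := set_add_of_not_mem _ _ hsV
  have hinit : BInv land s V [s] (PySem.Set.add V s, [s], 1,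
      PySem.Set.add PySem.Set.empty s.2) := by
    have hdrop : (PySem.Set.add V s).drop V.length = [s] := by
      rw [hadd, List.drop_left]
    refine ⟨by rw [hdrop, hadd], ?_, by rw [hdrop]; exact List.mem_singleton_self _,
      ?_, by rw [hdrop]; simp, ?_, ?_, ?_, ?_, ?_⟩
    · rw [hadd]
      refine List.Nodup.append hnd (List.nodup_singleton s) ?_
      intro a ha hax
      exact hsV (by rwa [List.mem_singleton.mp hax] at ha)
    · rw [hdrop]
      intro p hp
      rw [List.mem_singleton.mp hp]
      exact Relation.ReflTransGen.refl
    · intro c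
      rw [hdrop]
      have : (PySem.Set.add (PySem.Set.empty : PySem.Set Int) s.2) = [s.2] := by
        rw [set_add_of_not_mem _ _ (by simp [PySem.Set.empty])]
        rfl
      rw [this]
      simp
      exact eq_comm
    · have : (PySem.Set.add (PySem.Set.empty : PySem.Set Int) s.2) = [s.2] := by
        rw [set_add_of_not_mem _ _ (by simp [PySem.Set.empty])]
        rfl
      rw [this]
      simp
    · rw [hdrop]
      intro p hp
      rw [List.mem_singleton.mp hp]
      exact Or.inl (Or.inl (List.mem_singleton_self _))
    · intro p hp
      rw [hdrop]
      exact hp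
    · intro p hp
      rw [hdrop]
      exact hp
  obtain ⟨hfin, hclosed⟩ := bfsP_preserves land s V hs _ _ _ _ hinit
  obtain ⟨h1, h2, h3, h4, h5, h6, h7, h8, h9, h10⟩ := hfin
  dsimp only at h1 h2 h3 h4 h5 h6 h7
  set r := bfsP land (NI land) (MI land) (PySem.Set.add V s) [s] 1
    (PySem.Set.add PySem.Set.empty s.2) with hr
  refine ⟨r.1.drop V.length, h1, by rw [← h1]; exact h2, ?_, h5, ?_, h7⟩
  · intro p
    constructor
    · exact h4 p
    · intro hreach
      -- reachable cells are all collected: induction along the path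
      have main : ∀ q, ReachP land s q → q ∈ r.1.drop V.length := by
        intro q hq
        induction hq with
        | refl => exact h3
        | @tail x y hsx hadj ihq =>
          have hy : y ∈ r.1 := hclosed x ihq y hadj
          rw [h1] at hy
          rcases List.mem_append.mp hy with hyV | hyS
          · exfalso
            have : s ∈ V := visClosed_reach land V hVC hyV
              (reach_symm land (Relation.ReflTransGen.tail hsx hadj))
            exact hsV this
          · rw [h1, List.drop_left]
            exact hyS
      exact main p hreach
  · intro c
    rw [h6 c]
    constructor
    · rintro ⟨p, hp, he⟩
      exact ⟨p, h4 p hp, he⟩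
    · rintro ⟨p, hp, he⟩
      refine ⟨p, ?_, he⟩
      have main : ∀ q, ReachP land s q → q ∈ r.1.drop V.length := by
        intro q hq
        induction hq with
        | refl => exact h3
        | @tail x y hsx hadj ihq =>
          have hy : y ∈ r.1 := hclosed x ihq y hadj
          rw [h1] at hy
          rcases List.mem_append.mp hy with hyV | hyS
          · exfalso
            have : s ∈ V := visClosed_reach land V hVC hyV
              (reach_symm land (Relation.ReflTransGen.tail hsx hadj))
            exact hsV this
          · rw [h1, List.drop_left]
            exact hyS
      exact main p hp

-- ==== counting: component sizes via labels ====

theorem propagateB_shape (n m : Int) : ∀ lab : List Int,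
    ∃ lab' : List Int, propagateB n m lab = (sweepB n m lab').1 := by
  intro lab
  induction lab using propagateB.induct (n := n) (m := m) with
  | case1 L s h ih =>
    rw [propagateB_eq, if_pos (show (sweepB n m L).2 = true from h)]
    exact ih
  | case2 L s h =>
    rw [propagateB_eq, if_neg (show ¬ (sweepB n m L).2 = true from h)]
    exact ⟨L, rfl⟩

def cellsI (land : List (List Int)) : List (Int × Int) :=
  allCells (NI land).toNat (MI land).toNat

theorem mem_cellsI (land : List (List Int)) (p : Int × Int) :
    p ∈ cellsI land ↔ InRange land p := by
  unfold cellsI InRange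
  constructor
  · intro h
    simp only [allCells, List.mem_flatMap, List.mem_map, List.mem_range] at h
    obtain ⟨i, hi, j, hj, he⟩ := h
    subst he
    have hN : 0 ≤ NI land := by unfold NI; omega
    have hM : 0 ≤ MI land := by unfold MI; omega
    simp only [Int.ofNat_eq_natCast]
    omega
  · intro h
    exact mem_allCells _ _ p h.1 (by omega) h.2.2.1 (by omega)

theorem nodup_cellsI (land : List (List Int)) : (cellsI land).Nodup :=
  nodup_allCells _ _

def cntL (land : List (List Int)) (v : Int) : Int :=
  ((cellsI land).countP (fun p => labAt (MI land) (labD land) p == v) : Int)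

theorem cntL_nonneg (land : List (List Int)) (v : Int) : 0 ≤ cntL land v := by
  unfold cntL
  positivity

-- a component's cell list has length cntL of its label
theorem class_count (land : List (List Int)) (s : Int × Int) (hs : oilP land s)
    (S : List (Int × Int)) (hnd : S.Nodup) (hmem : ∀ p, p ∈ S ↔ ReachP land s p) :
    (S.length : Int) = cntL land (labAt (MI land) (labD land) s) := by
  obtain ⟨hI, hF⟩ := labD_spec land
  unfold cntL
  congr 1
  rw [List.countP_eq_length_filter]
  apply List.Perm.length_eq
  rw [List.perm_ext_iff_of_nodup hnd (List.Nodup.filter _ (nodup_cellsI land))]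
  intro p
  rw [List.mem_filter, hmem p, mem_cellsI]
  constructor
  · intro hreach
    have hpo : oilP land p := reach_oil land hreach hs
    exact ⟨hpo.1, by simp [lab_eq_reach land (labD land) hI hF hreach]⟩
  · rintro ⟨hpr, heq⟩
    simp only [beq_iff_eq] at heq
    have h0 : 0 ≤ labAt (MI land) (labD land) s := oil_lab_nonneg land (labD land) hI hs
    have hpo : oilP land p := lab_nonneg_oil land (labD land) hI hpr (by omega)
    exact reach_symm land (reach_of_lab_eq land (labD land) hI hpo hs heq)

-- positions ↔ cells for counting over the flat label list
theorem countP_range_blocks (mN : Nat) (R : Nat → Bool) : ∀ n : Nat,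
    (List.range (n * mN)).countP R =
      ((List.range n).map (fun i => (List.range mN).countP (fun j => R (i * mN + j)))).sum := by
  intro n
  induction n with
  | zero => simp
  | succ n ih =>
    have : (n + 1) * mN = n * mN + mN := by ring
    rw [this, List.range_add, List.countP_append, List.range_succ, List.map_append, ih]
    simp only [List.map_singleton, List.sum_append, List.sum_singleton]
    congr 1
    rw [List.countP_map]
    rfl

theorem count_labD (land : List (List Int)) (v : Int) :
    ((labD land).count v : Int) = cntL land v := by
  obtain ⟨lab', hshape⟩ := propagateB_shape (NI land) (MI land) (lab0D land)
  have hL : labD land = (PySem.List.pyRange 0 (NI land * MI land) 1).map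
      (relaxF (NI land) (MI land) lab') := by
    unfold labD
    rw [hshape, sweepB_eq]
  have hval : ∀ pos : Int, 0 ≤ pos → pos < NI land * MI land →
      relaxF (NI land) (MI land) lab' pos = PySem.List.pyGetD (labD land) pos 0 := by
    intro pos h0 h1
    rw [hL]
    exact (pyGetD_map_relaxF _ _ _ _ _ h0 h1).symm
  have hN : 0 ≤ NI land := by unfold NI; omega
  have hM : 0 ≤ MI land := by unfold MI; omega
  have hMM : ((MI land).toNat : Int) = MI land := by omega
  have hNM : (NI land * MI land).toNat = (NI land).toNat * (MI land).toNat := by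
    rw [show NI land * MI land = (((NI land).toNat * (MI land).toNat : Nat) : Int) from by
      push_cast
      rw [Int.toNat_of_nonneg hN, Int.toNat_of_nonneg hM], Int.toNat_natCast]
  unfold cntL
  have h1 : ((labD land).count v) = (PySem.List.pyRange 0 (NI land * MI land) 1).countP
      (fun pos => PySem.List.pyGetD (labD land) pos 0 == v) := by
    conv_lhs => rw [hL]
    rw [List.count_eq_countP, List.countP_map]
    apply List.countP_congr
    intro pos hpos
    obtain ⟨h0, hlt⟩ := PySem.List.mem_pyRange_one.mp hpos
    simp only [Function.comp_apply]
    rw [hval pos h0 hlt]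
  rw [h1]
  congr 1
  rw [PySem.List.pyRange_zero, List.countP_map, hNM, countP_range_blocks]
  unfold cellsI allCells
  rw [List.countP_flatMap]
  congr 1
  apply List.map_congr_left
  intro i hi
  simp only [Function.comp_apply]
  rw [List.countP_map]
  apply List.countP_congr
  intro j hj
  simp only [Function.comp_apply, labAt]
  have hcast : ((i * (MI land).toNat + j : Nat) : Int) =
      (Int.ofNat i) * MI land + (Int.ofNat j) := by
    push_cast
    rw [hMM]
    simp [Int.ofNat_eq_natCast]
  rw [hcast]

-- the size dictionary of the port of B holds exactly the label multiplicities
theorem size_fold_getD (l : List Int) : ∀ (d : PySem.Dict Int Int) (v : Int), 0 ≤ v →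
    (l.foldl (fun (d : PySem.Dict Int Int) w =>
        if 0 ≤ w then d.insert w (d.getD w 0 + 1) else d) d).getD v 0 =
      d.getD v 0 + (l.count v : Int) := by
  induction l with
  | nil => intro d v hv; simp
  | cons w t ih =>
    intro d v hv
    simp only [List.foldl_cons, List.count_cons]
    by_cases hw : 0 ≤ w
    · rw [if_pos hw, ih _ v hv, PySem.Dict.getD_insert]
      by_cases hvw : v = w
      · subst hvw
        simp
        push_cast
        omega
      · rw [if_neg hvw]
        have : (w == v) = false := by simpa using fun h => hvw h.symm
        rw [this]
        simp
    · rw [if_neg hw, ih _ v hv]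
      have : (w == v) = false := by
        simp only [beq_eq_false_iff_ne]
        intro h
        subst h
        exact hw hv
      rw [this]
      simp

-- ==== column labels and the common column-total function ====

def colLabels (land : List (List Int)) (k : Int) : List Int :=
  PySem.Set.ofList (((PySem.List.pyRange 0 (NI land) 1).map
    (fun i => labAt (MI land) (labD land) (i, k))).filter (fun v => decide (0 ≤ v)))

theorem nodup_colLabels (land : List (List Int)) (k : Int) : (colLabels land k).Nodup :=
  PySem.Set.nodup_ofList _

theorem mem_colLabels (land : List (List Int)) (k : Int) (v : Int) :
    v ∈ colLabels land k ↔
      ∃ i : Int, 0 ≤ i ∧ i < NI land ∧ labAt (MI land) (labD land) (i, k) = v ∧ 0 ≤ v := by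
  unfold colLabels
  rw [PySem.Set.mem_ofList, List.mem_filter]
  simp only [List.mem_map, PySem.List.mem_pyRange_one, decide_eq_true_eq]
  constructor
  · rintro ⟨⟨i, ⟨h0, h1⟩, he⟩, hv⟩
    exact ⟨i, h0, h1, he, hv⟩
  · rintro ⟨i, h0, h1, he, hv⟩
    exact ⟨⟨i, ⟨h0, h1⟩, he⟩, hv⟩

-- the total for column k (the common value both ports compute)
def TB (land : List (List Int)) (k : Int) : Int :=
  ((colLabels land k).map (fun v => cntL land v)).sum

theorem TB_nonneg (land : List (List Int)) (k : Int) : 0 ≤ TB land k := by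
  unfold TB
  apply List.sum_nonneg
  intro x hx
  simp only [List.mem_map] at hx
  obtain ⟨v, _, rfl⟩ := hx
  exact cntL_nonneg land v

-- ==== the scan invariant of the reference (A-side) ====

theorem mem_foldl_set_add {α : Type} [BEq α] [LawfulBEq α] (l : List α) :
    ∀ (s : PySem.Set α) (x : α), x ∈ l.foldl PySem.Set.add s ↔ x ∈ s ∨ x ∈ l := by
  induction l with
  | nil => intro s x; simp
  | cons a t ih =>
    intro s x
    simp only [List.foldl_cons]
    rw [ih, PySem.Set.mem_add]
    simp only [List.mem_cons]
    tauto

theorem dic_fold_getD (cnt : Int) (cs : List Int) (hnd : cs.Nodup) :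
    ∀ (d : PySem.Dict Int Int) (k : Int),
    (cs.foldl (fun d c => PySem.Dict.modify d c 0 (· + cnt)) d).getD k 0 =
      d.getD k 0 + (if k ∈ cs then cnt else 0) := by
  induction cs with
  | nil => intro d k; simp
  | cons c t ih =>
    intro d k
    have hnd' := List.nodup_cons.mp hnd
    simp only [List.foldl_cons]
    rw [ih hnd'.2]
    by_cases hkc : k = c
    · subst hkc
      rw [PySem.Dict.getD_modify, if_pos rfl, if_pos List.mem_cons_self,
        if_neg (fun hm => hnd'.1 hm)]
      omega
    · rw [PySem.Dict.getD_modify, if_neg hkc]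
      by_cases hkt : k ∈ t
      · rw [if_pos hkt, if_pos (List.mem_cons_of_mem _ hkt)]
      · rw [if_neg hkt, if_neg (fun hm => by
          rcases List.mem_cons.mp hm with h' | h'
          · exact hkc h'
          · exact hkt h')]

theorem dic_fold_keys (cnt : Int) (cs : List Int) (d : PySem.Dict Int Int) (k : Int) :
    k ∈ (cs.foldl (fun d c => PySem.Dict.modify d c 0 (· + cnt)) d).keys ↔
      k ∈ d.keys ∨ k ∈ cs := by
  rw [PySem.Dict.keys_foldl_modify cs 0 (fun _ _ => (· + cnt)) d]
  rw [show PySem.Set.update d.keys cs = cs.foldl PySem.Set.add d.keys from rfl]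
  exact mem_foldl_set_add cs d.keys k

theorem sum_map_update_one (l : List Int) (f g : Int → Int) (v0 c : Int) (hnd : l.Nodup)
    (hg : ∀ v ∈ l, v ≠ v0 → g v = f v) (hgv : v0 ∈ l → g v0 = f v0 + c) :
    (l.map g).sum = (l.map f).sum + (if v0 ∈ l then c else 0) := by
  induction l with
  | nil => simp
  | cons a t ih =>
    have hnd' := List.nodup_cons.mp hnd
    simp only [List.map_cons, List.sum_cons]
    by_cases hav : a = v0
    · subst hav
      rw [hgv List.mem_cons_self, if_pos List.mem_cons_self]
      have ht : (t.map g).sum = (t.map f).sum := by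
        have := ih hnd'.2 (fun v hv hne => hg v (List.mem_cons_of_mem _ hv) hne)
          (fun hm => absurd hm hnd'.1)
        rw [if_neg hnd'.1] at this
        omega
      omega
    · rw [hg a List.mem_cons_self hav]
      have ht := ih hnd'.2 (fun v hv hne => hg v (List.mem_cons_of_mem _ hv) hne)
        (fun hm => hgv (List.mem_cons_of_mem _ hm))
      by_cases hv0 : v0 ∈ t
      · rw [if_pos hv0] at ht
        rw [if_pos (List.mem_cons_of_mem _ hv0)]
        omega
      · rw [if_neg hv0] at ht
        rw [if_neg (fun hm => by
          rcases List.mem_cons.mp hm with h' | h'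
          · exact hav h'.symm
          · exact hv0 h')]
        omega

def procLabB (land : List (List Int)) (pref : List (Int × Int)) (v : Int) : Bool :=
  pref.any (fun t => oilB land t && (labAt (MI land) (labD land) t == v))

def TP (land : List (List Int)) (pref : List (Int × Int)) (k : Int) : Int :=
  ((colLabels land k).map
    (fun v => if procLabB land pref v then cntL land v else 0)).sum

def ScanInv (land : List (List Int)) (pref : List (Int × Int))
    (st : PySem.Set (Int × Int) × PySem.Dict Int Int) : Prop :=
  (∀ p : Int × Int, p ∈ st.1 ↔
    (oilP land p ∧ ∃ t ∈ pref, oilP land t ∧ ReachP land t p)) ∧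
  st.1.Nodup ∧
  (∀ k : Int, 0 ≤ k → k < MI land → st.2.getD k 0 = TP land pref k) ∧
  (∀ k : Int, k ∈ st.2.keys ↔
    ∃ t ∈ pref, oilP land t ∧ ∃ p : Int × Int, ReachP land t p ∧ p.2 = k)

theorem procLabB_append_one (land : List (List Int)) (pref : List (Int × Int))
    (s : Int × Int) (v : Int) :
    procLabB land (pref ++ [s]) v =
      (procLabB land pref v ||
        (oilB land s && (labAt (MI land) (labD land) s == v))) := by
  unfold procLabB
  rw [List.any_append]
  simp

theorem scan_step (land : List (List Int)) (pref : List (Int × Int))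
    (st : PySem.Set (Int × Int) × PySem.Dict Int Int) (i j : Int)
    (hin : InRange land (i, j)) (h : ScanInv land pref st) :
    ScanInv land (pref ++ [(i, j)]) (cellP land (NI land) (MI land) st i j) := by
  obtain ⟨hI, hF⟩ := labD_spec land
  obtain ⟨hv, hnd, hd, hk⟩ := h
  unfold cellP
  split
  · rename_i hg
    -- a fresh oil cell: one whole component is collected
    have hso : oilP land (i, j) := ⟨hin, by simpa using hg.1⟩
    have hsnv : (i, j) ∉ st.1 := fun hm => hg.2 ((contains_iff_mem _ _).mpr hm)
    have hVC : VisClosed land st.1 := by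
      constructor
      · intro p hp
        exact ((hv p).mp hp).1
      · intro p q hp hadj
        obtain ⟨hpo, t, ht, hto, hr⟩ := (hv p).mp hp
        exact (hv q).mpr ⟨hadj.2.1, t, ht, hto, Relation.ReflTransGen.tail hr hadj⟩
    obtain ⟨S, hS1, hS2, hS3, hS4, hS5, hS6⟩ :=
      bfsP_spec land (i, j) st.1 hVC hnd hso hsnv
    dsimp only
    set r := bfsP land (NI land) (MI land) (PySem.Set.add st.1 (i, j)) [(i, j)] 1
      (PySem.Set.add PySem.Set.empty (i, j).2) with hr
    set v0 := labAt (MI land) (labD land) (i, j) with hv0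
    have hv0n : 0 ≤ v0 := oil_lab_nonneg land (labD land) hI hso
    have hproc0 : procLabB land pref v0 = false := by
      rcases hb : procLabB land pref v0 with _ | _
      · rfl
      · exfalso
        obtain ⟨t, ht, htb⟩ := List.any_eq_true.mp hb
        rw [Bool.and_eq_true, oilB_iff, beq_iff_eq] at htb
        have hreach : ReachP land t (i, j) :=
          reach_of_lab_eq land (labD land) hI htb.1 hso htb.2
        exact hsnv ((hv (i, j)).mpr ⟨hso, t, ht, htb.1, hreach⟩)
    have hSnd : S.Nodup := (List.nodup_append.mp hS2).2.1
    have hcnt : r.2.1 = cntL land v0 := by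
      rw [hS4]
      exact class_count land (i, j) hso S hSnd hS3
    have hcols : ∀ k : Int, 0 ≤ k → k < MI land →
        (k ∈ r.2.2 ↔ v0 ∈ colLabels land k) := by
      intro k hk0 hk1
      rw [hS5, mem_colLabels]
      constructor
      · rintro ⟨p, hp, he⟩
        refine ⟨p.1, (reach_oil land hp hso).1.1, (reach_oil land hp hso).1.2.1, ?_, hv0n⟩
        have : (p.1, k) = p := by
          rw [← he]
        rw [this]
        exact (lab_eq_reach land (labD land) hI hF hp).symm
      · rintro ⟨i', h0, h1, he, _⟩
        have hio : oilP land (i', k) :=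
          lab_nonneg_oil land (labD land) hI ⟨h0, h1, hk0, hk1⟩ (by omega)
        exact ⟨(i', k), reach_of_lab_eq land (labD land) hI hso hio (by rw [he]), rfl⟩
    refine ⟨?_, by rw [hS1]; exact hS2, ?_, ?_⟩
    · intro p
      rw [hS1, List.mem_append, hv p, hS3 p]
      constructor
      · rintro (⟨hpo, t, ht, hto, hrt⟩ | hreach)
        · exact ⟨hpo, t, List.mem_append_left _ ht, hto, hrt⟩
        · exact ⟨reach_oil land hreach hso, (i, j),
            List.mem_append_right _ (List.mem_singleton_self _), hso, hreach⟩
      · rintro ⟨hpo, t, ht, hto, hrt⟩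
        rcases List.mem_append.mp ht with ht' | ht'
        · exact Or.inl ⟨hpo, t, ht', hto, hrt⟩
        · rw [List.mem_singleton.mp ht'] at hrt
          exact Or.inr hrt
    · intro k hk0 hk1
      rw [dic_fold_getD r.2.1 r.2.2 hS6 st.2 k, hd k hk0 hk1]
      unfold TP
      rw [sum_map_update_one (colLabels land k)
        (fun v => if procLabB land pref v then cntL land v else 0)
        (fun v => if procLabB land (pref ++ [(i, j)]) v then cntL land v else 0)
        v0 (cntL land v0) (nodup_colLabels land k)
        (fun v hvm hne => by
          show (if procLabB land (pref ++ [(i, j)]) v = true then cntL land v else 0) =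
            (if procLabB land pref v = true then cntL land v else 0)
          rw [procLabB_append_one]
          have : (labAt (MI land) (labD land) (i, j) == v) = false := by
            simpa using fun hh => hne (by rw [← hh])
          rw [this, Bool.and_false, Bool.or_false])
        (fun hvm => by
          show (if procLabB land (pref ++ [(i, j)]) v0 = true then cntL land v0 else 0) =
            (if procLabB land pref v0 = true then cntL land v0 else 0) + cntL land v0
          rw [procLabB_append_one, hproc0]
          simp [hso, hv0.symm, (oilB_iff land (i, j)).mpr hso])]
      congr 1
      rw [hcnt]
      by_cases hkc : k ∈ r.2.2
      · rw [if_pos hkc, if_pos ((hcols k hk0 hk1).mp hkc)]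
      · rw [if_neg hkc, if_neg (fun hm => hkc ((hcols k hk0 hk1).mpr hm))]
    · intro k
      rw [dic_fold_keys, hk k, hS5]
      constructor
      · rintro (⟨t, ht, hto, p, hp, he⟩ | ⟨p, hp, he⟩)
        · exact ⟨t, List.mem_append_left _ ht, hto, p, hp, he⟩
        · exact ⟨(i, j), List.mem_append_right _ (List.mem_singleton_self _), hso, p, hp, he⟩
      · rintro ⟨t, ht, hto, p, hp, he⟩
        rcases List.mem_append.mp ht with ht' | ht'
        · exact Or.inl ⟨t, ht', hto, p, hp, he⟩
        · rw [List.mem_singleton.mp ht'] at hp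
          exact Or.inr ⟨p, hp, he⟩
  · rename_i hg
    -- nothing to do: the cell is not oil, or its component was already collected
    rw [Classical.not_and_iff_not_or_not] at hg
    have hcase : ¬ oilP land (i, j) ∨ (i, j) ∈ st.1 := by
      rcases hg with hg1 | hg2
      · left
        intro ho
        exact hg1 (by simpa using ho.2)
      · right
        rw [Classical.not_not] at hg2
        exact (contains_iff_mem _ _).mp hg2
    have hnewt : ∀ p : Int × Int, (oilP land (i, j) ∧ ReachP land (i, j) p) →
        ∃ t ∈ pref, oilP land t ∧ ReachP land t p := by
      rintro p ⟨hso, hreach⟩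
      rcases hcase with hno | hvis
      · exact absurd hso hno
      · obtain ⟨_, t, ht, hto, hr⟩ := (hv (i, j)).mp hvis
        exact ⟨t, ht, hto, Relation.ReflTransGen.trans hr hreach⟩
    refine ⟨?_, hnd, ?_, ?_⟩
    · intro p
      rw [hv p]
      constructor
      · rintro ⟨hpo, t, ht, hto, hrt⟩
        exact ⟨hpo, t, List.mem_append_left _ ht, hto, hrt⟩
      · rintro ⟨hpo, t, ht, hto, hrt⟩
        rcases List.mem_append.mp ht with ht' | ht'
        · exact ⟨hpo, t, ht', hto, hrt⟩
        · rw [List.mem_singleton.mp ht'] at hrt hto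
          obtain ⟨t', ht', hto', hr'⟩ := hnewt p ⟨hto, hrt⟩
          exact ⟨hpo, t', ht', hto', hr'⟩
    · intro k hk0 hk1
      rw [hd k hk0 hk1]
      unfold TP
      congr 1
      apply List.map_congr_left
      intro v hvm
      rw [procLabB_append_one]
      rcases hb : procLabB land pref v with _ | _
      · rw [Bool.false_or]
        rcases hbs : (oilB land (i, j) && (labAt (MI land) (labD land) (i, j) == v))
          with _ | _
        · rfl
        · exfalso
          rw [Bool.and_eq_true, oilB_iff, beq_iff_eq] at hbs
          obtain ⟨t, ht, hto, hr⟩ := hnewt (i, j) ⟨hbs.1, Relation.ReflTransGen.refl⟩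
          have : procLabB land pref v = true := by
            apply List.any_eq_true.mpr
            refine ⟨t, ht, ?_⟩
            rw [Bool.and_eq_true, oilB_iff, beq_iff_eq]
            exact ⟨hto, by rw [lab_eq_reach land (labD land) hI hF hr, hbs.2]⟩
          rw [hb] at this
          exact absurd this (by simp)
      · rw [Bool.true_or]
    · intro k
      rw [hk k]
      constructor
      · rintro ⟨t, ht, hto, p, hp, he⟩
        exact ⟨t, List.mem_append_left _ ht, hto, p, hp, he⟩
      · rintro ⟨t, ht, hto, p, hp, he⟩
        rcases List.mem_append.mp ht with ht' | ht'
        · exact ⟨t, ht', hto, p, hp, he⟩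
        · rw [List.mem_singleton.mp ht'] at hp hto
          obtain ⟨t', ht', hto', hr'⟩ := hnewt p ⟨hto, hp⟩
          exact ⟨t', ht', hto', p, hr', he⟩

-- ==== the scan of the reference, whole-grid ====

theorem foldl_flatMap {α β γ : Type} (l : List γ) (g : γ → List α) (f : β → α → β) :
    ∀ init : β, l.foldl (fun st x => (g x).foldl f st) init = (l.flatMap g).foldl f init := by
  induction l with
  | nil => intro init; rfl
  | cons x t ih =>
    intro init
    rw [List.flatMap_cons, List.foldl_append, List.foldl_cons]
    exact ih _

def scanList (land : List (List Int)) : List (Int × Int) :=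
  (PySem.List.pyRange 0 (NI land) 1).flatMap (fun i =>
    (PySem.List.pyRange 0 (MI land) 1).map (fun j => (i, j)))

theorem mem_scanList (land : List (List Int)) (p : Int × Int) :
    p ∈ scanList land ↔ InRange land p := by
  unfold scanList InRange
  simp only [List.mem_flatMap, List.mem_map, PySem.List.mem_pyRange_one]
  constructor
  · rintro ⟨i, hi, j, hj, rfl⟩
    exact ⟨hi.1, hi.2, hj.1, hj.2⟩
  · rintro ⟨h1, h2, h3, h4⟩
    exact ⟨p.1, ⟨h1, h2⟩, p.2, ⟨h3, h4⟩, rfl⟩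

theorem scan_fold (land : List (List Int)) (l : List (Int × Int))
    (hl : ∀ p ∈ l, InRange land p) :
    ∀ (pref : List (Int × Int)) (st : PySem.Set (Int × Int) × PySem.Dict Int Int),
      ScanInv land pref st →
      ScanInv land (pref ++ l)
        (l.foldl (fun st p => cellP land (NI land) (MI land) st p.1 p.2) st) := by
  induction l with
  | nil => intro pref st h; simpa using h
  | cons p t ih =>
    intro pref st h
    have hstep := scan_step land pref st p.1 p.2 (hl p List.mem_cons_self) h
    have := ih (fun q hq => hl q (List.mem_cons_of_mem _ hq)) (pref ++ [p]) _ hstep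
    rw [List.append_assoc] at this
    simpa using this

theorem scanInv_init (land : List (List Int)) :
    ScanInv land [] (PySem.Set.empty, PySem.Dict.empty) := by
  refine ⟨?_, by simp [PySem.Set.empty], ?_, ?_⟩
  · intro p
    simp [PySem.Set.empty]
  · intro k _ _
    unfold TP procLabB
    simp [PySem.Dict.getD, PySem.Dict.get?, PySem.Dict.empty]
  · intro k
    simp [PySem.Dict.keys, PySem.Dict.empty]

theorem scanInv_final (land : List (List Int)) :
    ScanInv land (scanList land) (scanP land) := by
  have hinner : ∀ (i : Int) (st : PySem.Set (Int × Int) × PySem.Dict Int Int),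
      (PySem.List.pyRange 0 (MI land) 1).foldl
        (fun st j => cellP land (NI land) (MI land) st i j) st =
      ((PySem.List.pyRange 0 (MI land) 1).map (fun j => (i, j))).foldl
        (fun st p => cellP land (NI land) (MI land) st p.1 p.2) st := by
    intro i st
    rw [List.foldl_map]
  unfold scanP
  have : (PySem.List.pyRange 0 (NI land) 1).foldl (fun st i =>
      (PySem.List.pyRange 0 (MI land) 1).foldl
        (fun st j => cellP land (NI land) (MI land) st i j) st)
      (PySem.Set.empty, PySem.Dict.empty) =
    (scanList land).foldl (fun st p => cellP land (NI land) (MI land) st p.1 p.2)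
      (PySem.Set.empty, PySem.Dict.empty) := by
    unfold scanList
    rw [show (fun (st : PySem.Set (Int × Int) × PySem.Dict Int Int) (i : Int) =>
        (PySem.List.pyRange 0 (MI land) 1).foldl
          (fun st j => cellP land (NI land) (MI land) st i j) st) =
      (fun st i => ((PySem.List.pyRange 0 (MI land) 1).map (fun j => (i, j))).foldl
          (fun st p => cellP land (NI land) (MI land) st p.1 p.2) st) from
      funext fun st => funext fun i => hinner i st]
    rw [← foldl_flatMap]
  rw [this]
  have := scan_fold land (scanList land)
    (fun p hp => (mem_scanList land p).mp hp) [] _ (scanInv_init land)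
  simpa using this

theorem dic_final_getD (land : List (List Int)) (k : Int) (hk0 : 0 ≤ k)
    (hk1 : k < MI land) : (scanP land).2.getD k 0 = TB land k := by
  obtain ⟨_, _, hd, _⟩ := scanInv_final land
  rw [hd k hk0 hk1]
  unfold TP TB
  congr 1
  apply List.map_congr_left
  intro v hvm
  obtain ⟨i', h0, h1, he, hvn⟩ := (mem_colLabels land k v).mp hvm
  obtain ⟨hI, _⟩ := labD_spec land
  have hio : oilP land (i', k) :=
    lab_nonneg_oil land (labD land) hI ⟨h0, h1, hk0, hk1⟩ (by omega)
  have : procLabB land (scanList land) v = true := by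
    apply List.any_eq_true.mpr
    refine ⟨(i', k), (mem_scanList land _).mpr hio.1, ?_⟩
    rw [Bool.and_eq_true, oilB_iff, beq_iff_eq]
    exact ⟨hio, he⟩
  rw [this]
  simp

theorem dic_final_keys (land : List (List Int)) (k : Int) :
    k ∈ (scanP land).2.keys ↔ ∃ p : Int × Int, oilP land p ∧ p.2 = k := by
  obtain ⟨_, _, _, hk⟩ := scanInv_final land
  rw [hk k]
  constructor
  · rintro ⟨t, _, hto, p, hp, he⟩
    exact ⟨p, reach_oil land hp hto, he⟩
  · rintro ⟨p, hp, he⟩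
    exact ⟨p, (mem_scanList land p).mpr hp.1, hp, p, Relation.ReflTransGen.refl, he⟩

-- ==== the column totals of the port of B ====

def sizeB (land : List (List Int)) : PySem.Dict Int Int :=
  (labD land).foldl (fun (d : PySem.Dict Int Int) v =>
    if 0 ≤ v then d.insert v (d.getD v 0 + 1) else d) PySem.Dict.empty

theorem sizeB_getD (land : List (List Int)) (v : Int) (hv : 0 ≤ v) :
    (sizeB land).getD v 0 = cntL land v := by
  unfold sizeB
  rw [size_fold_getD _ _ v hv, count_labD]
  simp [PySem.Dict.getD, PySem.Dict.get?, PySem.Dict.empty]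

def innerF (land : List (List Int)) (k : Int) :
    (List Int × PySem.Set Int) → Int → (List Int × PySem.Set Int) :=
  fun st i =>
    if 0 ≤ PySem.List.pyGetD (labD land) (i * MI land + k) 0 ∧
        ¬ PySem.Set.contains st.2
          (PySem.List.pyGetD (labD land) (i * MI land + k) 0) = true then
      (PySem.List.pySetD st.1 k (PySem.List.pyGetD st.1 k 0 +
        (sizeB land).getD (PySem.List.pyGetD (labD land) (i * MI land + k) 0) 0),
       PySem.Set.add st.2 (PySem.List.pyGetD (labD land) (i * MI land + k) 0))
    else st

def totalsB (land : List (List Int)) : List Int :=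
  (PySem.List.pyRange 0 (MI land) 1).foldl (fun totals j =>
    ((PySem.List.pyRange 0 (NI land) 1).foldl (innerF land j)
      (totals, PySem.Set.empty)).1) (List.replicate (MI land).toNat 0)

theorem solution_alt_eq (land : List (List Int)) :
    solution_alt land =
      match PySem.List.max? (totalsB land) (fun x => x) with
      | some v => v
      | none => 0 := rfl

theorem getD_set_eq (l : List Int) (i : Nat) (v : Int) (h : i < l.length) :
    (l.set i v).getD i 0 = v := by
  rw [getD_def, List.getElem?_set]
  simp [h]

theorem getD_set_ne (l : List Int) (i k : Nat) (v : Int) (h : i ≠ k) :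
    (l.set i v).getD k 0 = l.getD k 0 := by
  rw [getD_def, getD_def, List.getElem?_set]
  simp [h]

theorem foldl_add_prefix {α : Type} [BEq α] [LawfulBEq α] (l : List α) :
    ∀ s : PySem.Set α, ∃ T : List α, l.foldl PySem.Set.add s = s ++ T := by
  induction l with
  | nil => intro s; exact ⟨[], by simp⟩
  | cons x t ih =>
    intro s
    simp only [List.foldl_cons]
    by_cases hx : x ∈ s
    · have : PySem.Set.add s x = s := by
        have hc : PySem.Set.contains s x = true := (contains_iff_mem s x).mpr hx
        unfold PySem.Set.add
        rw [if_pos hc]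
      rw [this]
      exact ih s
    · rw [set_add_of_not_mem s x hx]
      obtain ⟨T, hT⟩ := ih (s ++ [x])
      exact ⟨x :: T, by rw [hT]; simp⟩

def colLabsOf (land : List (List Int)) (k : Int) (rows : List Int) : List Int :=
  (rows.map (fun i => labAt (MI land) (labD land) (i, k))).filter (fun v => decide (0 ≤ v))

theorem inner_fold (land : List (List Int)) (k : Int) (hk0 : 0 ≤ k) (rows : List Int) :
    ∀ (tl : List Int) (seen : PySem.Set Int), k.toNat < tl.length →
    (rows.foldl (innerF land k) (tl, seen)).2 =
      (colLabsOf land k rows).foldl PySem.Set.add seen ∧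
    PySem.List.pyGetD (rows.foldl (innerF land k) (tl, seen)).1 k 0 =
      PySem.List.pyGetD tl k 0 +
      (((rows.foldl (innerF land k) (tl, seen)).2.drop seen.length).map
        (fun v => (sizeB land).getD v 0)).sum ∧
    (∀ k' : Int, 0 ≤ k' → k' ≠ k →
      PySem.List.pyGetD (rows.foldl (innerF land k) (tl, seen)).1 k' 0 =
        PySem.List.pyGetD tl k' 0) ∧
    (rows.foldl (innerF land k) (tl, seen)).1.length = tl.length := by
  induction rows with
  | nil =>
    intro tl seen hlen
    refine ⟨rfl, by simp, fun k' _ _ => rfl, rfl⟩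
  | cons i rest ih =>
    intro tl seen hlen
    simp only [List.foldl_cons]
    set v := PySem.List.pyGetD (labD land) (i * MI land + k) 0 with hv
    by_cases hvn : 0 ≤ v
    · have hcl : colLabsOf land k (i :: rest) = v :: colLabsOf land k rest := by
        unfold colLabsOf labAt
        simp only [List.map_cons, List.filter_cons]
        rw [if_pos (by simpa using hvn)]
      by_cases hcont : PySem.Set.contains seen v = true
      · have hstep : innerF land k (tl, seen) i = (tl, seen) := by
          unfold innerF
          rw [if_neg (fun hh => hh.2 hcont)]
        rw [hstep]
        obtain ⟨ih1, ih2, ih3, ih4⟩ := ih tl seen hlen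
        have hadd : PySem.Set.add seen v = seen := by
          unfold PySem.Set.add
          rw [if_pos hcont]
        refine ⟨by rw [ih1, hcl]; simp only [List.foldl_cons, hadd], ih2, ih3, ih4⟩
      · have hstep : innerF land k (tl, seen) i =
            (PySem.List.pySetD tl k (PySem.List.pyGetD tl k 0 + (sizeB land).getD v 0),
              PySem.Set.add seen v) := by
          unfold innerF
          rw [if_pos ⟨hvn, fun hh => absurd hh hcont⟩]
        rw [hstep]
        have hvm : v ∉ seen := fun hm => hcont ((contains_iff_mem _ _).mpr hm)
        have hadd : PySem.Set.add seen v = seen ++ [v] := set_add_of_not_mem _ _ hvm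
        set tl' := PySem.List.pySetD tl k (PySem.List.pyGetD tl k 0 + (sizeB land).getD v 0)
          with htl'
        have hlen' : k.toNat < tl'.length := by
          rw [htl', PySem.List.length_pySetD]
          exact hlen
        obtain ⟨ih1, ih2, ih3, ih4⟩ := ih tl' (PySem.Set.add seen v) hlen'
        have hres2 : (rest.foldl (innerF land k) (tl', PySem.Set.add seen v)).2 =
            (colLabsOf land k (i :: rest)).foldl PySem.Set.add seen := by
          rw [ih1, hcl]
          simp only [List.foldl_cons]
        obtain ⟨T, hT⟩ := foldl_add_prefix (colLabsOf land k rest) (PySem.Set.add seen v)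
        have hT' : (rest.foldl (innerF land k) (tl', PySem.Set.add seen v)).2 =
            seen ++ [v] ++ T := by
          rw [ih1, hT, hadd]
        refine ⟨hres2, ?_, ?_, by rw [ih4, htl', PySem.List.length_pySetD]⟩
        · rw [ih2]
          have hdrop1 : ((rest.foldl (innerF land k) (tl', PySem.Set.add seen v)).2.drop
              seen.length) = v :: T := by
            rw [hT', List.append_assoc, List.drop_append_of_le_length (le_refl _)]
            simp
          have hdrop2 : ((rest.foldl (innerF land k) (tl', PySem.Set.add seen v)).2.drop
              (PySem.Set.add seen v).length) = T := by
            rw [hT', hadd]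
            have : (seen ++ [v] ++ T).drop (seen ++ [v]).length = T := List.drop_left
            simpa using this
          rw [hdrop1, hdrop2]
          have hget : PySem.List.pyGetD tl' k 0 =
              PySem.List.pyGetD tl k 0 + (sizeB land).getD v 0 := by
            rw [htl', PySem.List.pySetD_of_nonneg _ _ hk0,
              PySem.List.pyGetD_of_nonneg _ _ hk0]
            exact getD_set_eq tl k.toNat _ hlen
          rw [hget]
          simp only [List.map_cons, List.sum_cons]
          omega
        · intro k' hk'0 hk'ne
          rw [ih3 k' hk'0 hk'ne, htl', PySem.List.pySetD_of_nonneg _ _ hk0,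
            PySem.List.pyGetD_of_nonneg _ _ hk'0, PySem.List.pyGetD_of_nonneg _ _ hk'0]
          exact getD_set_ne tl k.toNat k'.toNat _ (by omega)
    · have hcl : colLabsOf land k (i :: rest) = colLabsOf land k rest := by
        unfold colLabsOf labAt
        simp only [List.map_cons, List.filter_cons]
        rw [if_neg (by simpa using hvn)]
      have hstep : innerF land k (tl, seen) i = (tl, seen) := by
        unfold innerF
        rw [if_neg (fun hh => hvn hh.1)]
      rw [hstep, hcl]
      exact ih tl seen hlen

theorem col_total (land : List (List Int)) (k : Int) (hk0 : 0 ≤ k) (tl : List Int)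
    (hlen : k.toNat < tl.length) (hz : PySem.List.pyGetD tl k 0 = 0) :
    PySem.List.pyGetD ((PySem.List.pyRange 0 (NI land) 1).foldl (innerF land k)
      (tl, PySem.Set.empty)).1 k 0 = TB land k ∧
    (∀ k' : Int, 0 ≤ k' → k' ≠ k →
      PySem.List.pyGetD ((PySem.List.pyRange 0 (NI land) 1).foldl (innerF land k)
        (tl, PySem.Set.empty)).1 k' 0 = PySem.List.pyGetD tl k' 0) ∧
    ((PySem.List.pyRange 0 (NI land) 1).foldl (innerF land k)
      (tl, PySem.Set.empty)).1.length = tl.length := by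
  obtain ⟨h1, h2, h3, h4⟩ := inner_fold land k hk0 (PySem.List.pyRange 0 (NI land) 1) tl
    PySem.Set.empty hlen
  refine ⟨?_, h3, h4⟩
  rw [h2, hz]
  have hcl : (colLabsOf land k (PySem.List.pyRange 0 (NI land) 1)).foldl PySem.Set.add
      PySem.Set.empty = colLabels land k := by
    rw [show (PySem.Set.empty : PySem.Set Int) = [] from rfl, ← PySem.Set.ofList_eq_foldl]
    rfl
  have hempty : (PySem.Set.empty : PySem.Set Int).length = 0 := rfl
  rw [h1, hcl, hempty, List.drop_zero]
  unfold TB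
  have : (colLabels land k).map (fun v => (sizeB land).getD v 0) =
      (colLabels land k).map (fun v => cntL land v) := by
    apply List.map_congr_left
    intro v hvm
    obtain ⟨_, _, _, _, hvn⟩ := (mem_colLabels land k v).mp hvm
    exact sizeB_getD land v hvn
  rw [this]
  omega

theorem outer_fold (land : List (List Int)) : ∀ (cols : List Int) (totals : List Int),
    (∀ k ∈ cols, 0 ≤ k) → cols.Nodup →
    (MI land).toNat ≤ totals.length →
    (∀ k ∈ cols, k.toNat < totals.length) →
    (∀ k ∈ cols, PySem.List.pyGetD totals k 0 = 0) →
    (cols.foldl (fun totals j =>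
      ((PySem.List.pyRange 0 (NI land) 1).foldl (innerF land j)
        (totals, PySem.Set.empty)).1) totals).length = totals.length ∧
    (∀ k : Int, 0 ≤ k →
      (k ∈ cols → PySem.List.pyGetD (cols.foldl (fun totals j =>
        ((PySem.List.pyRange 0 (NI land) 1).foldl (innerF land j)
          (totals, PySem.Set.empty)).1) totals) k 0 = TB land k) ∧
      (k ∉ cols → PySem.List.pyGetD (cols.foldl (fun totals j =>
        ((PySem.List.pyRange 0 (NI land) 1).foldl (innerF land j)
          (totals, PySem.Set.empty)).1) totals) k 0 = PySem.List.pyGetD totals k 0)) := by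
  intro cols
  induction cols with
  | nil =>
    intro totals _ _ _ _ _
    exact ⟨rfl, fun k _ => ⟨fun hm => absurd hm (by simp), fun _ => rfl⟩⟩
  | cons j rest ih =>
    intro totals hpos hnd hMlen hlen hz
    have hj0 : 0 ≤ j := hpos j List.mem_cons_self
    have hjlen : j.toNat < totals.length := hlen j List.mem_cons_self
    obtain ⟨hc1, hc2, hc3⟩ := col_total land j hj0 totals hjlen (hz j List.mem_cons_self)
    set totals' := ((PySem.List.pyRange 0 (NI land) 1).foldl (innerF land j)
      (totals, PySem.Set.empty)).1 with ht'
    have hnd' := List.nodup_cons.mp hnd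
    have hrec := ih totals' (fun k hk => hpos k (List.mem_cons_of_mem _ hk)) hnd'.2
      (by rw [hc3]; exact hMlen) (fun k hk => by rw [hc3]; exact hlen k (List.mem_cons_of_mem _ hk))
      (fun k hk => by
        rw [hc2 k (hpos k (List.mem_cons_of_mem _ hk))
          (fun he => hnd'.1 (he ▸ hk))]
        exact hz k (List.mem_cons_of_mem _ hk))
    simp only [List.foldl_cons]
    refine ⟨by rw [hrec.1, hc3], ?_⟩
    intro k hk0
    constructor
    · intro hm
      rcases List.mem_cons.mp hm with rfl | hmr
      · rw [(hrec.2 k hk0).2 hnd'.1]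
        exact hc1
      · exact (hrec.2 k hk0).1 hmr
    · intro hnm
      rw [(hrec.2 k hk0).2 (fun hmr => hnm (List.mem_cons_of_mem _ hmr))]
      exact hc2 k hk0 (fun he => hnm (he ▸ List.mem_cons_self))

-- ==== final assembly ====

theorem getD_replicate_zero (n i : Nat) : (List.replicate n (0 : Int)).getD i 0 = 0 := by
  rw [getD_def, List.getElem?_replicate]
  split_ifs <;> rfl

theorem totalsB_len (land : List (List Int)) : (totalsB land).length = (MI land).toNat := by
  unfold totalsB
  have hM : 0 ≤ MI land := by unfold MI; omega
  obtain ⟨hlen, _⟩ := outer_fold land (PySem.List.pyRange 0 (MI land) 1)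
    (List.replicate (MI land).toNat 0)
    (fun k hk => (PySem.List.mem_pyRange_one.mp hk).1)
    (PySem.List.nodup_pyRange_one _ _)
    (by simp)
    (fun k hk => by
      obtain ⟨h0, h1⟩ := PySem.List.mem_pyRange_one.mp hk
      simp only [List.length_replicate]
      omega)
    (fun k hk => by
      obtain ⟨h0, h1⟩ := PySem.List.mem_pyRange_one.mp hk
      rw [PySem.List.pyGetD_of_nonneg _ _ h0]
      exact getD_replicate_zero _ _)
  rw [hlen]
  simp

theorem totalsB_val (land : List (List Int)) (k : Int) (hk0 : 0 ≤ k) (hk1 : k < MI land) :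
    PySem.List.pyGetD (totalsB land) k 0 = TB land k := by
  unfold totalsB
  obtain ⟨_, hval⟩ := outer_fold land (PySem.List.pyRange 0 (MI land) 1)
    (List.replicate (MI land).toNat 0)
    (fun k' hk => (PySem.List.mem_pyRange_one.mp hk).1)
    (PySem.List.nodup_pyRange_one _ _)
    (by simp)
    (fun k' hk => by
      obtain ⟨h0, h1⟩ := PySem.List.mem_pyRange_one.mp hk
      simp only [List.length_replicate]
      omega)
    (fun k' hk => by
      obtain ⟨h0, h1⟩ := PySem.List.mem_pyRange_one.mp hk
      rw [PySem.List.pyGetD_of_nonneg _ _ h0]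
      exact getD_replicate_zero _ _)
  exact (hval k hk0).1 (PySem.List.mem_pyRange_one.mpr ⟨hk0, hk1⟩)

theorem colLabels_empty_of_no_oil (land : List (List Int)) (k : Int) (hk0 : 0 ≤ k)
    (hk1 : k < MI land) (hno : ∀ p : Int × Int, oilP land p → p.2 ≠ k) :
    colLabels land k = [] := by
  obtain ⟨hI, _⟩ := labD_spec land
  rw [List.eq_nil_iff_forall_not_mem]
  intro v hv
  obtain ⟨i', h0, h1, he, hvn⟩ := (mem_colLabels land k v).mp hv
  have hio : oilP land (i', k) :=
    lab_nonneg_oil land (labD land) hI ⟨h0, h1, hk0, hk1⟩ (by omega)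
  exact hno (i', k) hio rfl

-- the relation between A's dict of column totals and B's flat array of column totals
def Rdic (m : Int) (dic : PySem.Dict Int Int) (totals : List Int) : Prop :=
  (totals.length : Int) = m ∧
  (∀ k ∈ dic.keys, 0 ≤ k ∧ k < m ∧ dic.getD k 0 = totals.getD k.toNat 0) ∧
  (∀ jj : Nat, (jj : Int) < m → ((jj : Int) ∈ dic.keys ∨ totals.getD jj 0 = 0)) ∧
  (∀ jj : Nat, 0 ≤ totals.getD jj 0)

theorem Rdic_final (land : List (List Int)) :
    Rdic (MI land) (scanP land).2 (totalsB land) := by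
  have hM : 0 ≤ MI land := by unfold MI; omega
  refine ⟨by rw [totalsB_len]; omega, ?_, ?_, ?_⟩
  · intro k hk
    obtain ⟨p, hpo, he⟩ := (dic_final_keys land k).mp hk
    have hk0 : 0 ≤ k := by rw [← he]; exact hpo.1.2.2.1
    have hk1 : k < MI land := by rw [← he]; exact hpo.1.2.2.2
    refine ⟨hk0, hk1, ?_⟩
    rw [dic_final_getD land k hk0 hk1]
    have := totalsB_val land k hk0 hk1
    rw [PySem.List.pyGetD_of_nonneg _ _ hk0] at this
    rw [this]
  · intro jj hjj
    by_cases hoil : ∃ p : Int × Int, oilP land p ∧ p.2 = (jj : Int)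
    · exact Or.inl ((dic_final_keys land _).mpr hoil)
    · right
      have hval := totalsB_val land (jj : Int) (by positivity) hjj
      rw [PySem.List.pyGetD_of_nonneg _ _ (by positivity), Int.toNat_natCast] at hval
      rw [hval]
      unfold TB
      rw [colLabels_empty_of_no_oil land (jj : Int) (by positivity) hjj
        (fun p hp he => hoil ⟨p, hp, he⟩)]
      rfl
  · intro jj
    by_cases hlt : jj < (totalsB land).length
    · have hjm : (jj : Int) < MI land := by
        have := totalsB_len land
        omega
      have hval := totalsB_val land (jj : Int) (by positivity) hjm
      rw [PySem.List.pyGetD_of_nonneg _ _ (by positivity), Int.toNat_natCast] at hval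
      rw [hval]
      exact TB_nonneg land _
    · rw [getD_def, List.getElem?_eq_none (by omega)]
      rfl

theorem finalEq (m : Int) (dic : PySem.Dict Int Int) (totals : List Int)
    (h : Rdic m dic totals) :
    (match PySem.List.max? dic.keys (fun k => dic.getD k 0) with
      | some k => dic.getD k 0
      | none => 0) =
    (match PySem.List.max? totals (fun x => x) with
      | some v => v
      | none => 0) := by
  obtain ⟨ha, hb, hcc, hd⟩ := h
  cases hmk : PySem.List.max? dic.keys (fun k => dic.getD k 0) with
  | none =>
    have hkeys : dic.keys = [] := (PySem.List.max?_eq_none_iff _ _).mp hmk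
    have hz : ∀ jj : Nat, jj < totals.length → totals.getD jj 0 = 0 := by
      intro jj hjj
      rcases hcc jj (by omega) with hL | hR
      · rw [hkeys] at hL
        simp at hL
      · exact hR
    cases hmt : PySem.List.max? totals (fun x => x) with
    | none => rfl
    | some v =>
      have hv := PySem.List.max?_mem hmt
      obtain ⟨idx, hidx, rfl⟩ := List.mem_iff_getElem.mp hv
      have := hz idx hidx
      rw [List.getD_eq_getElem _ _ hidx] at this
      simp [this]
  | some k =>
    have hk := PySem.List.max?_mem hmk
    obtain ⟨hk0, hkm, hkeq⟩ := hb k hk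
    have hlen : 0 < totals.length := by omega
    cases hmt : PySem.List.max? totals (fun x => x) with
    | none =>
      have : totals = [] := (PySem.List.max?_eq_none_iff _ _).mp hmt
      rw [this] at hlen
      simp at hlen
    | some v =>
      have hle1 : dic.getD k 0 ≤ v := by
        have hmem : totals.getD k.toNat 0 ∈ totals := by
          rw [List.getD_eq_getElem _ _ (by omega)]
          exact List.getElem_mem _
        have := PySem.List.max?_isMax hmt _ hmem
        simpa [hkeq] using this
      have hle2 : v ≤ dic.getD k 0 := by
        have hv := PySem.List.max?_mem hmt
        obtain ⟨idx, hidx, rfl⟩ := List.mem_iff_getElem.mp hv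
        have hgd : totals[idx] = totals.getD idx 0 := (List.getD_eq_getElem _ _ hidx).symm
        rcases hcc idx (by omega) with hL | hR
        · obtain ⟨_, _, heq⟩ := hb _ hL
          have := PySem.List.max?_isMax hmk _ hL
          rw [heq] at this
          rw [show ((idx : Int)).toNat = idx by omega] at this
          rw [hgd]
          exact this
        · rw [hgd, hR]
          rw [hkeq]
          exact hd k.toNat
      dsimp only
      omega

theorem AB_eq (land : List (List Int)) : solution land = solution_alt land := by
  rw [solution_eq_solP, solution_alt_eq]
  unfold solP
  exact finalEq (MI land) (scanP land).2 (totalsB land) (Rdic_final land)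

-- ===== VERDICT (by name: the statement is the Claim_ definition above) =====
theorem solution_spec : Claim_equal_solution := by
  intro land _ _
  unfold Spec_solution
  exact AB_eq land
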